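-- pv_equiv track=rewrite | github.com/lonely-wolf-howl/coding-test | baekjoon/16768.py | process
-- ===== SOURCE A (Python) =====
-- from collections import deque
--
-- def is_in_bounds(x: int, y: int, n: int, m: int):
--     return 0 <= x < n and 0 <= y < m
--
-- def bfs(grid, x: int, y: int, n: int, k: int, visited):
--     queue = deque()
--     queue.append((x, y))
--     visited[x][y] = True
--     color = grid[x][y]
--     cells = [(x, y)]
--     directions = [(-1, 0), (1, 0), (0, -1), (0, 1)]
--
--     while queue:
--         cx, cy = queue.popleft()
--         for dx, dy in directions:
--             nx, ny = cx + dx, cy + dy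
--
--             if is_in_bounds(nx, ny, n, 10) and not visited[nx][ny] and grid[nx][ny] == color:
--                 visited[nx][ny] = True
--                 queue.append((nx, ny))
--                 cells.append((nx, ny))
--
--     if len(cells) >= k:
--         return cells
--
--     return []
--
-- def apply_gravity(grid, n: int):
--     for col in range(10):
--         stack = []
--         for row in range(n):
--             if grid[row][col] != 0:
--                 stack.append(grid[row][col])
--
--         for row in range(n - 1, -1, -1):  # range(start, stop, step)
--             if stack:
--                 grid[row][col] = stack.pop()
--             else:
--                 grid[row][col] = 0
--
-- def process(n: int, k: int, grid):
--     while True: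
--         visited = [[False] * 10 for _ in range(n)]
--         found = False
--
--         for i in range(n):
--             for j in range(10):
--                 if grid[i][j] != 0 and not visited[i][j]:
--                     cells_to_remove = bfs(grid, i, j, n, k, visited)
--                     if cells_to_remove:
--                         found = True
--                         for x, y in cells_to_remove:
--                             grid[x][y] = 0
--
--         if not found:
--             break
--
--         apply_gravity(grid, n)
--
--     return grid
-- ===== SOURCE B (Python) =====
-- def process(n, k, grid):
--     while True:
--         # label each non-zero cell with its flat index, then propagate the
--         # minimum label across equal-colored neighbors until stable
--         labels = {}
--         for i in range(n):
--             for j in range(10):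
--                 if grid[i][j] != 0:
--                     labels[(i, j)] = i * 10 + j
--         changed = True
--         while changed:
--             changed = False
--             for (i, j), l in list(labels.items()):
--                 m = l
--                 for (x, y) in ((i - 1, j), (i + 1, j), (i, j - 1), (i, j + 1)):
--                     if (x, y) in labels and grid[x][y] == grid[i][j]:
--                         if labels[(x, y)] < m:
--                             m = labels[(x, y)]
--                 if m < l:
--                     labels[(i, j)] = m
--                     changed = True
--         # group cells by final label; each group is one connected component
--         groups = {}
--         for cell, l in labels.items():
--             groups.setdefault(l, []).append(cell)
--         found = False
--         for cells in groups.values():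
--             if len(cells) >= k:
--                 found = True
--                 for (i, j) in cells:
--                     grid[i][j] = 0
--         if not found:
--             break
--         # gravity: each column becomes zeros on top, non-zeros (in order) below
--         for col in range(10):
--             nz = [grid[row][col] for row in range(n) if grid[row][col] != 0]
--             pad = n - len(nz)
--             for row in range(n):
--                 grid[row][col] = 0 if row < pad else nz[row - pad]
--     return grid
-- ===== Notes on version B (the rewrite author's own statement) =====
-- stated objective: alternative
-- what changed: Per pass, the shared-visited BFS flood fill (deque per group) is replaced by iterated minimum-label propagation over all cells until a fixpoint, then grouping cells by final label; gravity's stack-push/pop column compaction is replaced by rebuilding each column directly as zeros followed by its non-zero entries in order.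
import Mathlib
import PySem

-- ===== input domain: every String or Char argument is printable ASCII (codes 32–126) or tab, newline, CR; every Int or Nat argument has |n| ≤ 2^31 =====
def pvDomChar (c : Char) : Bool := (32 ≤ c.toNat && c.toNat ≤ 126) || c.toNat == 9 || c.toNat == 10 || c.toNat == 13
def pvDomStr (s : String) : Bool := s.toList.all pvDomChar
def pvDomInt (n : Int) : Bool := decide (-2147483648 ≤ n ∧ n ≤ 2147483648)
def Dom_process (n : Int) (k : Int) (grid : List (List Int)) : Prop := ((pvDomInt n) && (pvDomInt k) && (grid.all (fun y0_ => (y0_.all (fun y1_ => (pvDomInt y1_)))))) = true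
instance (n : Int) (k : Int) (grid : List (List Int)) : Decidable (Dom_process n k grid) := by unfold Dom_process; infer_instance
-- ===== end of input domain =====

-- B replaces A's shared-visited BFS flood fill by iterated min-label propagation and
-- A's stack-based gravity by a direct zeros-then-nonzeros column rebuild (objective:
-- alternative).  A mutates the grid in place and returns it; the equivalence proved
-- here is about the RETURN value only.

-- shared cell accessors (grid[x][y] read / write, exact on in-range indices admitted by Pre_)
def pvCell (g : List (List Int)) (x y : Int) : Int :=
  PySem.List.pyGetD (PySem.List.pyGetD g x []) y 0

def pvPut (g : List (List Int)) (x y : Int) (v : Int) : List (List Int) :=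
  PySem.List.pySetD g x (PySem.List.pySetD (PySem.List.pyGetD g x []) y v)

-- fuel for the outer `while True` loop of both programs: one pass with removals
-- strictly decreases the number of non-zero cells, so this many passes suffice
def pvFuel (g : List (List Int)) (n : Int) : Nat :=
  ((List.range n.toNat).map (fun i =>
    ((List.range 10).filter (fun j => pvCell g (i : Int) (j : Int) ≠ 0)).length)).sum + 1

-- ===== PORT A =====
def isInBounds (x y n m : Int) : Bool :=
  decide (0 ≤ x ∧ x < n) && decide (0 ≤ y ∧ y < m)

def vGet (v : List (List Bool)) (x y : Int) : Bool :=
  PySem.List.pyGetD (PySem.List.pyGetD v x []) y false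

def vSet (v : List (List Bool)) (x y : Int) : List (List Bool) :=
  PySem.List.pySetD v x (PySem.List.pySetD (PySem.List.pyGetD v x []) y true)

def bfsStep (grid : List (List Int)) (n color : Int) (c : Int × Int)
    (st : List (Int × Int) × List (List Bool) × List (Int × Int)) (d : Int × Int) :
    List (Int × Int) × List (List Bool) × List (Int × Int) :=
  let nx := c.1 + d.1
  let ny := c.2 + d.2
  if isInBounds nx ny n 10 && !(vGet st.2.1 nx ny) && (pvCell grid nx ny == color) then
    (st.1 ++ [(nx, ny)], vSet st.2.1 nx ny, st.2.2 ++ [(nx, ny)])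
  else st

def bfsLoop (grid : List (List Int)) (n color : Int) :
    Nat → List (Int × Int) → List (List Bool) → List (Int × Int) →
    List (List Bool) × List (Int × Int)
  | 0, _, v, cells => (v, cells)
  | _ + 1, [], v, cells => (v, cells)
  | fuel + 1, c :: rest, v, cells =>
    let st := [((-1 : Int), (0 : Int)), (1, 0), (0, -1), (0, 1)].foldl
      (bfsStep grid n color c) (rest, v, cells)
    bfsLoop grid n color fuel st.1 st.2.1 st.2.2

def bfs (grid : List (List Int)) (x y n k : Int) (v : List (List Bool)) :
    List (List Bool) × List (Int × Int) :=
  let v1 := vSet v x y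
  let color := pvCell grid x y
  let r := bfsLoop grid n color (n.toNat * 10 + 1) [(x, y)] v1 [(x, y)]
  if k ≤ (r.2.length : Int) then r else (r.1, [])

def applyGravityA (grid : List (List Int)) (n : Int) : List (List Int) :=
  (PySem.List.pyRange 0 10 1).foldl (fun g col =>
    let stack := (PySem.List.pyRange 0 n 1).foldl (fun s row =>
      if pvCell g row col ≠ 0 then s ++ [pvCell g row col] else s) ([] : List Int)
    let r := (PySem.List.pyRange (n - 1) (-1) (-1)).foldl
      (fun (p : List (List Int) × List Int) row =>
        match p.2.getLast? with
        | some val => (pvPut p.1 row col val, p.2.dropLast)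
        | none => (pvPut p.1 row col 0, p.2)) (g, stack)
    r.1) grid

def passA (grid : List (List Int)) (n k : Int) : Bool × List (List Int) :=
  let v0 : List (List Bool) := (PySem.List.pyRange 0 n 1).map (fun _ => List.replicate 10 false)
  let st := (PySem.List.pyRange 0 n 1).foldl (fun st i =>
    (PySem.List.pyRange 0 10 1).foldl
      (fun (st : List (List Bool) × Bool × List (List Int)) j =>
        if pvCell st.2.2 i j ≠ 0 && !(vGet st.1 i j) then
          let r := bfs st.2.2 i j n k st.1
          if r.2 ≠ [] then
            (r.1, true, r.2.foldl (fun g c => pvPut g c.1 c.2 0) st.2.2)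
          else (r.1, st.2.1, st.2.2)
        else st) st) (v0, false, grid)
  (st.2.1, st.2.2)

def loopA (n k : Int) : Nat → List (List Int) → List (List Int)
  | 0, g => g
  | fuel + 1, g =>
    let r := passA g n k
    if r.1 then loopA n k fuel (applyGravityA r.2 n) else r.2

def process (n : Int) (k : Int) (grid : List (List Int)) : List (List Int) :=
  loopA n k (pvFuel grid n) grid

-- ===== PORT B =====
def initLabels (grid : List (List Int)) (n : Int) : PySem.Dict (Int × Int) Int :=
  (PySem.List.pyRange 0 n 1).foldl (fun d i =>
    (PySem.List.pyRange 0 10 1).foldl (fun d j =>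
      if pvCell grid i j ≠ 0 then d.insert (i, j) (i * 10 + j) else d) d) PySem.Dict.empty

def sweepStep (grid : List (List Int)) (st : PySem.Dict (Int × Int) Int × Bool)
    (it : (Int × Int) × Int) : PySem.Dict (Int × Int) Int × Bool :=
  let i := it.1.1
  let j := it.1.2
  let m := [(i - 1, j), (i + 1, j), (i, j - 1), (i, j + 1)].foldl (fun m q =>
    if st.1.contains q && (pvCell grid q.1 q.2 == pvCell grid i j) then
      (if st.1.getD q 0 < m then st.1.getD q 0 else m)
    else m) it.2
  if m < it.2 then (st.1.insert it.1 m, true) else st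

def sweepLoop (grid : List (List Int)) :
    Nat → PySem.Dict (Int × Int) Int → PySem.Dict (Int × Int) Int
  | 0, L => L
  | fuel + 1, L =>
    let st := L.items.foldl (sweepStep grid) (L, false)
    if st.2 then sweepLoop grid fuel st.1 else st.1

def passB (grid : List (List Int)) (n k : Int) : Bool × List (List Int) :=
  let L := sweepLoop grid (n.toNat * 10 * (n.toNat * 10) + 1) (initLabels grid n)
  let groups := L.items.foldl (fun d it => d.modify it.2 [] (fun l => l ++ [it.1]))
    (PySem.Dict.empty : PySem.Dict Int (List (Int × Int)))
  groups.values.foldl (fun (st : Bool × List (List Int)) cells =>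
    if k ≤ (cells.length : Int) then
      (true, cells.foldl (fun g c => pvPut g c.1 c.2 0) st.2)
    else st) (false, grid)

def applyGravityB (grid : List (List Int)) (n : Int) : List (List Int) :=
  (PySem.List.pyRange 0 10 1).foldl (fun g col =>
    let nz := ((PySem.List.pyRange 0 n 1).filter (fun row => pvCell g row col ≠ 0)).map
      (fun row => pvCell g row col)
    let pad := n - (nz.length : Int)
    (PySem.List.pyRange 0 n 1).foldl (fun g row =>
      pvPut g row col (if row < pad then 0 else PySem.List.pyGetD nz (row - pad) 0)) g) grid

def loopB (n k : Int) : Nat → List (List Int) → List (List Int)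
  | 0, g => g
  | fuel + 1, g =>
    let r := passB g n k
    if r.1 then loopB n k fuel (applyGravityB r.2 n) else r.2

def process_alt (n : Int) (k : Int) (grid : List (List Int)) : List (List Int) :=
  loopB n k (pvFuel grid n) grid

-- ===== PRECONDITION & SPEC =====
-- Pre_ is exactly where A returns: A raises IndexError when n exceeds the number of
-- rows or some row among the first n has fewer than 10 entries.
def Pre_process (n : Int) (k : Int) (grid : List (List Int)) : Prop :=
  n ≤ (grid.length : Int) ∧ ∀ row ∈ grid.take n.toNat, 10 ≤ row.length

instance (n : Int) (k : Int) (grid : List (List Int)) : Decidable (Pre_process n k grid) := by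
  unfold Pre_process; infer_instance

def pvWitness_process : Int × Int × List (List Int) :=
  (2, 3, [[1, 1, 0, 0, 0, 0, 0, 0, 0, 2], [1, 0, 0, 0, 0, 0, 0, 0, 0, 2]])

def Spec_process (n : Int) (k : Int) (grid : List (List Int)) (out : List (List Int)) : Prop := out = process_alt n k grid
instance (n : Int) (k : Int) (grid : List (List Int)) (out : List (List Int)) : Decidable (Spec_process n k grid out) := by unfold Spec_process; infer_instance

-- ===== CLAIM (what is proved, stated in full; the proofs are below) =====
def Claim_equal_process : Prop := ∀ (n : Int) (k : Int) (grid : List (List Int)), Dom_process n k grid → Pre_process n k grid → Spec_process n k grid (process n k grid)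

-- ===== LEMMAS AND PROOFS =====

-- ---------- basic grid plumbing ----------

def inbP (n : Int) (c : Int × Int) : Prop := 0 ≤ c.1 ∧ c.1 < n ∧ 0 ≤ c.2 ∧ c.2 < 10

def ShpP (n : Int) (g : List (List Int)) : Prop :=
  n ≤ (g.length : Int) ∧ ∀ i : Nat, (i : Int) < n → 10 ≤ (g.getD i []).length

theorem pyGetD_nonneg' {α : Type} (xs : List α) (i : Int) (d : α) (h : 0 ≤ i) :
    PySem.List.pyGetD xs i d = xs.getD i.toNat d := by
  rcases Int.eq_ofNat_of_zero_le h with ⟨m, rfl⟩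
  simp

theorem cell_nonneg_eq (g : List (List Int)) (x y : Int) (hx : 0 ≤ x) (hy : 0 ≤ y) :
    pvCell g x y = (g.getD x.toNat []).getD y.toNat 0 := by
  simp [pvCell, pyGetD_nonneg' _ _ _ hx, pyGetD_nonneg' _ _ _ hy]

theorem getD_set_ne {α : Type} (l : List α) (i j : Nat) (v d : α) (h : i ≠ j) :
    (l.set i v).getD j d = l.getD j d := by
  simp [List.getD_eq_getElem?_getD, h]

theorem getD_set_self {α : Type} (l : List α) (i : Nat) (v d : α) (h : i < l.length) :
    (l.set i v).getD i d = v := by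
  simp [List.getD_eq_getElem?_getD, h]

theorem pvPut_eq (g : List (List Int)) (x y v : Int) (hx : 0 ≤ x) (hy : 0 ≤ y) :
    pvPut g x y v = g.set x.toNat ((g.getD x.toNat []).set y.toNat v) := by
  simp [pvPut, PySem.List.pySetD_of_nonneg _ _ hx, PySem.List.pySetD_of_nonneg _ _ hy,
    pyGetD_nonneg' _ _ _ hx]

theorem length_pvPut (g : List (List Int)) (x y v : Int) (hx : 0 ≤ x) (hy : 0 ≤ y) :
    (pvPut g x y v).length = g.length := by
  simp [pvPut_eq g x y v hx hy]

theorem rowlen_pvPut (g : List (List Int)) (x y v : Int) (hx : 0 ≤ x) (hy : 0 ≤ y) (i : Nat) :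
    ((pvPut g x y v).getD i []).length = (g.getD i []).length := by
  rw [pvPut_eq g x y v hx hy]
  by_cases hi : x.toNat = i
  · subst hi
    by_cases hlt : x.toNat < g.length
    · rw [getD_set_self _ _ _ _ hlt]; simp
    · rw [List.set_eq_of_length_le (by omega)]
  · rw [getD_set_ne _ _ _ _ _ hi]

-- entry of a put, at Int coordinates
theorem cell_pvPut (g : List (List Int)) (x y v : Int) (n : Int)
    (hg : ShpP n g) (hxy : inbP n (x, y)) (c : Int × Int) (hc : inbP n c) :
    pvCell (pvPut g x y v) c.1 c.2 = if c = (x, y) then v else pvCell g c.1 c.2 := by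
  obtain ⟨hx0, hxn, hy0, hy10⟩ := hxy
  obtain ⟨hc10, hc1n, hc20, hc210⟩ := hc
  have hglen := hg.1
  have hxlen : x.toNat < g.length := by omega
  have hylen : y.toNat < (g.getD x.toNat []).length := by
    have := hg.2 x.toNat (by omega); omega
  rw [cell_nonneg_eq _ _ _ hc10 hc20, cell_nonneg_eq _ _ _ hc10 hc20,
    pvPut_eq g x y v hx0 hy0]
  by_cases h1 : c.1.toNat = x.toNat
  · rw [h1, getD_set_self _ _ _ _ hxlen]
    by_cases h2 : c.2.toNat = y.toNat
    · rw [h2, getD_set_self _ _ _ _ hylen]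
      have hcx : c = (x, y) := by
        have e1 : c.1 = x := by omega
        have e2 : c.2 = y := by omega
        rw [Prod.ext_iff]; exact ⟨e1, e2⟩
      simp [hcx]
    · rw [getD_set_ne _ _ _ _ _ (fun h => h2 h.symm)]
      have hne : c ≠ (x, y) := by
        intro h; subst h; exact h2 (by simp)
      simp [hne]
  · rw [getD_set_ne _ _ _ _ _ (fun h => h1 h.symm)]
    have hne : c ≠ (x, y) := by
      intro h; subst h; exact h1 (by simp)
    simp [hne]

theorem get?_pvPut_hi (g : List (List Int)) (x y v : Int) (hx : 0 ≤ x) (hy : 0 ≤ y)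
    (i : Nat) (hi : x.toNat ≠ i) : (pvPut g x y v)[i]? = g[i]? := by
  rw [pvPut_eq g x y v hx hy]
  simp [List.getElem?_set, hi]

theorem row_get?_pvPut (g : List (List Int)) (x y v : Int) (hx : 0 ≤ x) (hy : 0 ≤ y)
    (i j : Nat) (hj : y.toNat ≠ j) : ((pvPut g x y v).getD i [])[j]? = (g.getD i [])[j]? := by
  rw [pvPut_eq g x y v hx hy]
  by_cases h1 : x.toNat = i
  · subst h1
    by_cases hlt : x.toNat < g.length
    · rw [getD_set_self _ _ _ _ hlt]
      simp [List.getElem?_set, hj]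
    · rw [List.set_eq_of_length_le (by omega)]
  · rw [getD_set_ne _ _ _ _ _ h1]

-- "agrees with g0 outside the n×10 window, and has the same shape"
def SameOut (n : Int) (g0 g : List (List Int)) : Prop :=
  g.length = g0.length ∧
  (∀ i : Nat, ¬ ((i : Int) < n) → g[i]? = g0[i]?) ∧
  (∀ i : Nat, (i : Int) < n → (g.getD i []).length = (g0.getD i []).length ∧
      ∀ j : Nat, 10 ≤ j → (g.getD i [])[j]? = (g0.getD i [])[j]?)

theorem sameOut_refl (n : Int) (g : List (List Int)) : SameOut n g g :=
  ⟨rfl, fun _ _ => rfl, fun _ _ => ⟨rfl, fun _ _ => rfl⟩⟩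

theorem sameOut_trans {n : Int} {g0 g1 g2 : List (List Int)}
    (h1 : SameOut n g0 g1) (h2 : SameOut n g1 g2) : SameOut n g0 g2 := by
  obtain ⟨a1, b1, c1⟩ := h1; obtain ⟨a2, b2, c2⟩ := h2
  refine ⟨a2.trans a1, fun i hi => (b2 i hi).trans (b1 i hi), fun i hi => ?_⟩
  exact ⟨(c2 i hi).1.trans (c1 i hi).1, fun j hj => ((c2 i hi).2 j hj).trans ((c1 i hi).2 j hj)⟩

theorem sameOut_pvPut (n : Int) (g : List (List Int)) (x y v : Int) (hxy : inbP n (x, y)) :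
    SameOut n g (pvPut g x y v) := by
  obtain ⟨hx0, hxn, hy0, hy10⟩ := hxy
  refine ⟨length_pvPut g x y v hx0 hy0, fun i hi => ?_, fun i hi => ?_⟩
  · exact get?_pvPut_hi g x y v hx0 hy0 i (by omega)
  · exact ⟨rowlen_pvPut g x y v hx0 hy0 i, fun j hj => row_get?_pvPut g x y v hx0 hy0 i j (by omega)⟩

theorem shp_of_sameOut {n : Int} {g0 g : List (List Int)} (h : SameOut n g0 g)
    (hg : ShpP n g0) : ShpP n g := by
  refine ⟨by rw [h.1]; exact hg.1, fun i hi => ?_⟩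
  rw [(h.2.2 i hi).1]; exact hg.2 i hi

-- two grids with the same outside behaviour and equal window entries are equal
theorem grid_ext {n : Int} {g0 g1 g2 : List (List Int)}
    (hg : ShpP n g0) (h1 : SameOut n g0 g1) (h2 : SameOut n g0 g2)
    (h : ∀ c : Int × Int, inbP n c → pvCell g1 c.1 c.2 = pvCell g2 c.1 c.2) : g1 = g2 := by
  obtain ⟨a1, b1, c1⟩ := h1; obtain ⟨a2, b2, c2⟩ := h2
  apply List.ext_getElem?
  intro i
  by_cases hi : (i : Int) < n
  · have hilen : i < g0.length := by have := hg.1; omega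
    have hi1 : i < g1.length := by omega
    have hi2 : i < g2.length := by omega
    have hrow : g1.getD i [] = g2.getD i [] := by
      apply List.ext_getElem?
      intro j
      by_cases hj : j < 10
      · have hl0 : 10 ≤ (g0.getD i []).length := hg.2 i hi
        have hl1 : j < (g1.getD i []).length := by rw [(c1 i hi).1]; omega
        have hl2 : j < (g2.getD i []).length := by rw [(c2 i hi).1]; omega
        have hc := h ((i : Int), (j : Int)) ⟨by omega, by omega, by omega, by omega⟩
        rw [cell_nonneg_eq _ _ _ (by omega) (by omega),
          cell_nonneg_eq _ _ _ (by omega) (by omega)] at hc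
        simp only [Int.toNat_natCast] at hc
        rw [List.getD_eq_getElem _ _ hl1, List.getD_eq_getElem _ _ hl2] at hc
        rw [List.getElem?_eq_getElem hl1, List.getElem?_eq_getElem hl2, hc]
      · rw [(c1 i hi).2 j (by omega), (c2 i hi).2 j (by omega)]
    rw [List.getElem?_eq_getElem hi1, List.getElem?_eq_getElem hi2,
      ← List.getD_eq_getElem g1 [] hi1, ← List.getD_eq_getElem g2 [] hi2, hrow]
  · rw [b1 i hi, b2 i hi]
-- ---------- components of the same-color adjacency graph ----------

def adjC (c d : Int × Int) : Prop :=
  (c.1 = d.1 ∧ (d.2 = c.2 + 1 ∨ d.2 = c.2 - 1)) ∨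
  (c.2 = d.2 ∧ (d.1 = c.1 + 1 ∨ d.1 = c.1 - 1))

def EE (n : Int) (g : List (List Int)) (c d : Int × Int) : Prop :=
  inbP n c ∧ inbP n d ∧ adjC c d ∧ pvCell g c.1 c.2 ≠ 0 ∧
  pvCell g c.1 c.2 = pvCell g d.1 d.2

def ConnP (n : Int) (g : List (List Int)) : Int × Int → Int × Int → Prop :=
  Relation.ReflTransGen (EE n g)

def suppP (n : Int) (g : List (List Int)) (c : Int × Int) : Prop :=
  inbP n c ∧ pvCell g c.1 c.2 ≠ 0

theorem adjC_symm {c d : Int × Int} (h : adjC c d) : adjC d c := by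
  unfold adjC at *; omega

theorem EE_symm {n : Int} {g : List (List Int)} {c d : Int × Int} (h : EE n g c d) :
    EE n g d c := by
  obtain ⟨h1, h2, h3, h4, h5⟩ := h
  exact ⟨h2, h1, adjC_symm h3, by rw [← h5]; exact h4, h5.symm⟩

theorem conn_symm {n : Int} {g : List (List Int)} {c d : Int × Int} (h : ConnP n g c d) :
    ConnP n g d c :=
  Relation.ReflTransGen.symmetric (fun _ _ h => EE_symm h) h

theorem conn_trans {n : Int} {g : List (List Int)} {a b c : Int × Int}
    (h1 : ConnP n g a b) (h2 : ConnP n g b c) : ConnP n g a c :=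
  Relation.ReflTransGen.trans h1 h2

theorem conn_supp {n : Int} {g : List (List Int)} {c d : Int × Int}
    (hc : suppP n g c) (h : ConnP n g c d) :
    suppP n g d ∧ pvCell g d.1 d.2 = pvCell g c.1 c.2 := by
  induction h with
  | refl => exact ⟨hc, rfl⟩
  | tail _ he ih =>
    obtain ⟨⟨hi, hnz⟩, hcol⟩ := ih
    obtain ⟨_, hib, _, hnz', hcol'⟩ := he
    refine ⟨⟨hib, by rw [← hcol']; exact hnz'⟩, by rw [← hcol', hcol]⟩

def BigP (n k : Int) (g : List (List Int)) (c : Int × Int) : Prop :=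
  ∃ l : List (Int × Int), l.Nodup ∧ (∀ d, d ∈ l ↔ ConnP n g c d) ∧ k ≤ (l.length : Int)

theorem big_iff_of_enum {n k : Int} {g : List (List Int)} {c : Int × Int}
    {l : List (Int × Int)} (hnd : l.Nodup) (hmem : ∀ d, d ∈ l ↔ ConnP n g c d) :
    BigP n k g c ↔ k ≤ (l.length : Int) := by
  constructor
  · rintro ⟨l', hnd', hmem', hk⟩
    have : l'.Perm l :=
      (List.perm_ext_iff_of_nodup hnd' hnd).mpr (fun d => (hmem' d).trans (hmem d).symm)
    rwa [this.length_eq] at hk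
  · intro hk; exact ⟨l, hnd, hmem, hk⟩

theorem big_congr {n k : Int} {g : List (List Int)} {c c' : Int × Int}
    (h : ConnP n g c c') : BigP n k g c ↔ BigP n k g c' := by
  have key : ∀ d, ConnP n g c d ↔ ConnP n g c' d :=
    fun d => ⟨fun hd => conn_trans (conn_symm h) hd, fun hd => conn_trans h hd⟩
  constructor
  · rintro ⟨l, hnd, hmem, hk⟩
    exact ⟨l, hnd, fun d => (hmem d).trans (key d), hk⟩
  · rintro ⟨l, hnd, hmem, hk⟩
    exact ⟨l, hnd, fun d => (hmem d).trans (key d).symm, hk⟩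

def RemP (n k : Int) (g : List (List Int)) (c : Int × Int) : Prop :=
  suppP n g c ∧ BigP n k g c

-- ---------- zeroing a list of in-bounds cells ----------

theorem zero_fold (n : Int) (g : List (List Int)) (hg : ShpP n g) (L : List (Int × Int))
    (hL : ∀ c ∈ L, inbP n c) :
    SameOut n g (L.foldl (fun g c => pvPut g c.1 c.2 0) g) ∧
    ShpP n (L.foldl (fun g c => pvPut g c.1 c.2 0) g) ∧
    ∀ c, inbP n c → pvCell (L.foldl (fun g c => pvPut g c.1 c.2 0) g) c.1 c.2 =
      if c ∈ L then 0 else pvCell g c.1 c.2 := by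
  induction L generalizing g with
  | nil => exact ⟨sameOut_refl n g, hg, fun c _ => by simp⟩
  | cons c0 tl ih =>
    have hc0 : inbP n c0 := hL c0 (by simp)
    have hc0' : inbP n (c0.1, c0.2) := hc0
    have hso : SameOut n g (pvPut g c0.1 c0.2 0) := sameOut_pvPut n g c0.1 c0.2 0 hc0'
    have hg1 : ShpP n (pvPut g c0.1 c0.2 0) := shp_of_sameOut hso hg
    obtain ⟨iso, ishp, icell⟩ := ih (pvPut g c0.1 c0.2 0) hg1 (fun c hc => hL c (by simp [hc]))
    refine ⟨sameOut_trans hso iso, ishp, fun c hc => ?_⟩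
    rw [List.foldl_cons, icell c hc]
    have hput := cell_pvPut g c0.1 c0.2 0 n hg hc0' c hc
    by_cases hmem : c ∈ tl
    · simp [hmem]
    · by_cases hec : c = c0
      · subst hec
        simp [hmem, hput]
      · have : c ≠ (c0.1, c0.2) := by simpa using hec
        simp [hmem, hec, hput, this]
-- ---------- gravity: stack compaction (A) = direct column rebuild (B) ----------

theorem dropLast_getD (l : List Int) (i : Nat) (d : Int) (h : i < l.length - 1) :
    l.dropLast.getD i d = l.getD i d := by
  rw [List.getD_eq_getElem _ _ (by simp; omega), List.getD_eq_getElem _ _ (by omega),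
    List.getElem_dropLast]

theorem stack_eq (g : List (List Int)) (col : Int) (l : List Int) (acc : List Int) :
    l.foldl (fun s row => if pvCell g row col ≠ 0 then s ++ [pvCell g row col] else s) acc
      = acc ++ (l.filter (fun row => pvCell g row col ≠ 0)).map (fun row => pvCell g row col) := by
  induction l generalizing acc with
  | nil => simp
  | cons a tl ih =>
    rw [List.foldl_cons, List.filter_cons]
    by_cases h : pvCell g a col = 0
    · rw [if_neg (not_not_intro h), ih]
      simp [h]
    · rw [if_pos h, ih]
      simp [h]

theorem colB (n col : Int) (hcol : 0 ≤ col ∧ col < 10) (nz : List Int) :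
    ∀ m : Nat, ∀ a : Int, 0 ≤ a → (n - a).toNat = m → ∀ g, ShpP n g →
      SameOut n g ((PySem.List.pyRange a n 1).foldl (fun g row =>
          pvPut g row col (if row < n - (nz.length : Int) then 0
            else PySem.List.pyGetD nz (row - (n - (nz.length : Int))) 0)) g) ∧
      ShpP n ((PySem.List.pyRange a n 1).foldl (fun g row =>
          pvPut g row col (if row < n - (nz.length : Int) then 0
            else PySem.List.pyGetD nz (row - (n - (nz.length : Int))) 0)) g) ∧
      ∀ c, inbP n c → pvCell ((PySem.List.pyRange a n 1).foldl (fun g row =>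
          pvPut g row col (if row < n - (nz.length : Int) then 0
            else PySem.List.pyGetD nz (row - (n - (nz.length : Int))) 0)) g) c.1 c.2 =
        if c.2 = col ∧ a ≤ c.1 then
          (if c.1 < n - (nz.length : Int) then 0
            else PySem.List.pyGetD nz (c.1 - (n - (nz.length : Int))) 0)
        else pvCell g c.1 c.2 := by
  intro m
  induction m with
  | zero =>
    intro a ha hm g hg
    rw [PySem.List.pyRange_one_eq_nil (by omega)]
    refine ⟨sameOut_refl n g, hg, fun c hc => ?_⟩
    have : ¬ (c.2 = col ∧ a ≤ c.1) := by
      obtain ⟨_, h2, _, _⟩ := hc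
      rintro ⟨_, h⟩; omega
    simp [this]
  | succ m ih =>
    intro a ha hm g hg
    rw [PySem.List.pyRange_one_cons (by omega), List.foldl_cons]
    have hainb : inbP n (a, col) := ⟨ha, by omega, hcol.1, hcol.2⟩
    set v := (if a < n - (nz.length : Int) then 0
      else PySem.List.pyGetD nz (a - (n - (nz.length : Int))) 0) with hv
    have hso : SameOut n g (pvPut g a col v) := sameOut_pvPut n g a col v hainb
    have hg1 : ShpP n (pvPut g a col v) := shp_of_sameOut hso hg
    obtain ⟨iso, ishp, icell⟩ := ih (a + 1) (by omega) (by omega) (pvPut g a col v) hg1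
    refine ⟨sameOut_trans hso iso, ishp, fun c hc => ?_⟩
    rw [icell c hc]
    have hput := cell_pvPut g a col v n hg hainb c hc
    by_cases h1 : c.2 = col ∧ a + 1 ≤ c.1
    · rw [if_pos h1, if_pos (show c.2 = col ∧ a ≤ c.1 from ⟨h1.1, by omega⟩)]
    · rw [if_neg h1, hput]
      by_cases h2 : c = (a, col)
      · rw [if_pos h2, if_pos (show c.2 = col ∧ a ≤ c.1 by rw [h2]; exact ⟨rfl, le_refl a⟩)]
        rw [hv, h2]
      · rw [if_neg h2, if_neg ?_]
        rintro ⟨hc2, hc1⟩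
        have hca : c.1 = a := by
          rcases not_and_or.mp h1 with h | h
          · exact absurd hc2 h
          · omega
        exact h2 (Prod.ext hca (by rw [hc2]))

theorem colA (n col : Int) (hcol : 0 ≤ col ∧ col < 10) :
    ∀ m : Nat, ∀ r : Int, r < n → (r + 1).toNat = m → ∀ g s, ShpP n g →
      SameOut n g ((PySem.List.pyRange r (-1) (-1)).foldl
        (fun (p : List (List Int) × List Int) row =>
          match p.2.getLast? with
          | some val => (pvPut p.1 row col val, p.2.dropLast)
          | none => (pvPut p.1 row col 0, p.2)) (g, s)).1 ∧
      ShpP n ((PySem.List.pyRange r (-1) (-1)).foldl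
        (fun (p : List (List Int) × List Int) row =>
          match p.2.getLast? with
          | some val => (pvPut p.1 row col val, p.2.dropLast)
          | none => (pvPut p.1 row col 0, p.2)) (g, s)).1 ∧
      ∀ c, inbP n c → pvCell ((PySem.List.pyRange r (-1) (-1)).foldl
        (fun (p : List (List Int) × List Int) row =>
          match p.2.getLast? with
          | some val => (pvPut p.1 row col val, p.2.dropLast)
          | none => (pvPut p.1 row col 0, p.2)) (g, s)).1 c.1 c.2 =
        if c.2 = col ∧ c.1 ≤ r then
          (if (s.length : Int) < r + 1 - c.1 then 0 else s.getD (s.length - (r + 1 - c.1).toNat) 0)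
        else pvCell g c.1 c.2 := by
  intro m
  induction m with
  | zero =>
    intro r hr hm g s hg
    rw [PySem.List.pyRange_neg_one_eq_nil (by omega)]
    refine ⟨sameOut_refl n g, hg, fun c hc => ?_⟩
    have : ¬ (c.2 = col ∧ c.1 ≤ r) := by
      obtain ⟨h1, _, _, _⟩ := hc
      rintro ⟨_, h⟩; omega
    simp [this]
  | succ m ih =>
    intro r hr hm g s hg
    have hr0 : 0 ≤ r := by omega
    rw [PySem.List.pyRange_neg_one_cons (by omega), List.foldl_cons]
    have hrinb : inbP n (r, col) := ⟨hr0, hr, hcol.1, hcol.2⟩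
    -- the row-r step
    rcases hs : s.getLast? with _ | val
    · -- empty stack: write 0, stack unchanged
      have hsnil : s = [] := by
        cases s with
        | nil => rfl
        | cons a tl => simp [List.getLast?_eq_some_getLast] at hs
      subst hsnil
      simp only [hs]
      have hso : SameOut n g (pvPut g r col 0) := sameOut_pvPut n g r col 0 hrinb
      have hg1 : ShpP n (pvPut g r col 0) := shp_of_sameOut hso hg
      obtain ⟨iso, ishp, icell⟩ := ih (r - 1) (by omega) (by omega) (pvPut g r col 0) [] hg1
      refine ⟨sameOut_trans hso iso, ishp, fun c hc => ?_⟩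
      rw [icell c hc]
      have hput := cell_pvPut g r col 0 n hg hrinb c hc
      by_cases h1 : c.2 = col ∧ c.1 ≤ r - 1
      · rw [if_pos h1, if_pos (show c.2 = col ∧ c.1 ≤ r from ⟨h1.1, by omega⟩)]
        simp
      · rw [if_neg h1, hput]
        by_cases h2 : c = (r, col)
        · rw [if_pos h2, if_pos (show c.2 = col ∧ c.1 ≤ r by rw [h2]; exact ⟨rfl, le_refl r⟩)]
          simp
        · rw [if_neg h2, if_neg ?_]
          rintro ⟨hc2, hc1⟩
          have hcr : c.1 = r := by
            rcases not_and_or.mp h1 with h | h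
            · exact absurd hc2 h
            · omega
          exact h2 (Prod.ext hcr (by rw [hc2]))
    · -- nonempty stack: write last, pop
      have hsne : s ≠ [] := by
        intro h; subst h; simp at hs
      have hval : val = s.getD (s.length - 1) 0 := by
        have h1 : s.getLast hsne = s.getD (s.length - 1) 0 := by
          rw [List.getD_eq_getElem _ _ (by simp [List.length_pos_iff.mpr hsne])]
          exact List.getLast_eq_getElem hsne
        rw [List.getLast?_eq_some_getLast hsne] at hs
        cases hs; exact h1
      simp only [hs]
      have hso : SameOut n g (pvPut g r col val) := sameOut_pvPut n g r col val hrinb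
      have hg1 : ShpP n (pvPut g r col val) := shp_of_sameOut hso hg
      obtain ⟨iso, ishp, icell⟩ := ih (r - 1) (by omega) (by omega) (pvPut g r col val) s.dropLast hg1
      refine ⟨sameOut_trans hso iso, ishp, fun c hc => ?_⟩
      rw [icell c hc]
      have hput := cell_pvPut g r col val n hg hrinb c hc
      have hlen : s.dropLast.length = s.length - 1 := by simp
      have hlpos : 1 ≤ s.length := List.length_pos_iff.mpr hsne
      by_cases h1 : c.2 = col ∧ c.1 ≤ r - 1
      · rw [if_pos h1, if_pos (show c.2 = col ∧ c.1 ≤ r from ⟨h1.1, by omega⟩), hlen]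
        by_cases h3 : (s.length : Int) < r + 1 - c.1
        · rw [if_pos (by push_cast; omega), if_pos h3]
        · rw [if_neg (by push_cast; omega), if_neg h3]
          rw [dropLast_getD _ _ _ (by omega)]
          congr 1
          omega
      · rw [if_neg h1, hput]
        by_cases h2 : c = (r, col)
        · rw [if_pos h2, if_pos (show c.2 = col ∧ c.1 ≤ r by rw [h2]; exact ⟨rfl, le_refl r⟩)]
          rw [if_neg (by rw [h2]; push_cast; omega), hval, h2]
          congr 1
          omega
        · rw [if_neg h2, if_neg ?_]
          rintro ⟨hc2, hc1⟩
          have hcr : c.1 = r := by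
            rcases not_and_or.mp h1 with h | h
            · exact absurd hc2 h
            · omega
          exact h2 (Prod.ext hcr (by rw [hc2]))

-- one column of gravity: A's two loops agree with B's rebuild
theorem gravity_col_eq (n col : Int) (hcol : 0 ≤ col ∧ col < 10) (g : List (List Int))
    (hg : ShpP n g) :
    ((PySem.List.pyRange (n - 1) (-1) (-1)).foldl
        (fun (p : List (List Int) × List Int) row =>
          match p.2.getLast? with
          | some val => (pvPut p.1 row col val, p.2.dropLast)
          | none => (pvPut p.1 row col 0, p.2))
        (g, (PySem.List.pyRange 0 n 1).foldl (fun s row =>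
          if pvCell g row col ≠ 0 then s ++ [pvCell g row col] else s) ([] : List Int))).1 =
      (PySem.List.pyRange 0 n 1).foldl (fun h row =>
        pvPut h row col
          (if row < n - ((((PySem.List.pyRange 0 n 1).filter
                (fun row => pvCell g row col ≠ 0)).map (fun row => pvCell g row col)).length : Int)
           then 0
           else PySem.List.pyGetD (((PySem.List.pyRange 0 n 1).filter
                (fun row => pvCell g row col ≠ 0)).map (fun row => pvCell g row col))
             (row - (n - ((((PySem.List.pyRange 0 n 1).filter
                (fun row => pvCell g row col ≠ 0)).map (fun row => pvCell g row col)).length : Int))) 0)) g ∧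
    ShpP n ((PySem.List.pyRange 0 n 1).foldl (fun h row =>
        pvPut h row col
          (if row < n - ((((PySem.List.pyRange 0 n 1).filter
                (fun row => pvCell g row col ≠ 0)).map (fun row => pvCell g row col)).length : Int)
           then 0
           else PySem.List.pyGetD (((PySem.List.pyRange 0 n 1).filter
                (fun row => pvCell g row col ≠ 0)).map (fun row => pvCell g row col))
             (row - (n - ((((PySem.List.pyRange 0 n 1).filter
                (fun row => pvCell g row col ≠ 0)).map (fun row => pvCell g row col)).length : Int))) 0)) g) := by
  set nz := ((PySem.List.pyRange 0 n 1).filter (fun row => pvCell g row col ≠ 0)).map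
      (fun row => pvCell g row col) with hnz
  have hstack : (PySem.List.pyRange 0 n 1).foldl (fun s row =>
      if pvCell g row col ≠ 0 then s ++ [pvCell g row col] else s) ([] : List Int) = nz := by
    rw [stack_eq, List.nil_append]
  obtain ⟨asol, ashp, acell⟩ := colA n col hcol (n - 1 + 1).toNat (n - 1) (by omega) rfl g nz hg
  obtain ⟨bsol, bshp, bcell⟩ := colB n col hcol nz (n - 0).toNat 0 (by omega) (by omega) g hg
  rw [hstack]
  refine ⟨grid_ext hg asol bsol (fun c hc => ?_), bshp⟩
  rw [acell c hc, bcell c hc]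
  obtain ⟨h10, h1n, h20, h210⟩ := hc
  by_cases h1 : c.2 = col
  · rw [if_pos (show c.2 = col ∧ c.1 ≤ n - 1 from ⟨h1, by omega⟩),
      if_pos (show c.2 = col ∧ (0 : Int) ≤ c.1 from ⟨h1, h10⟩)]
    by_cases h3 : (nz.length : Int) < n - 1 + 1 - c.1
    · rw [if_pos h3, if_pos (by omega)]
    · rw [if_neg h3, if_neg (by omega)]
      rw [pyGetD_nonneg' _ _ _ (by omega)]
      congr 1
      omega
  · rw [if_neg (by rintro ⟨h, _⟩; exact h1 h), if_neg (by rintro ⟨h, _⟩; exact h1 h)]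

theorem gravity_fold (n : Int) (cols : List Int) (h : ∀ c ∈ cols, 0 ≤ c ∧ c < 10) :
    ∀ g, ShpP n g →
      cols.foldl (fun g col =>
        let stack := (PySem.List.pyRange 0 n 1).foldl (fun s row =>
          if pvCell g row col ≠ 0 then s ++ [pvCell g row col] else s) ([] : List Int)
        let r := (PySem.List.pyRange (n - 1) (-1) (-1)).foldl
          (fun (p : List (List Int) × List Int) row =>
            match p.2.getLast? with
            | some val => (pvPut p.1 row col val, p.2.dropLast)
            | none => (pvPut p.1 row col 0, p.2)) (g, stack)
        r.1) g =
      cols.foldl (fun g col =>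
        let nz := ((PySem.List.pyRange 0 n 1).filter (fun row => pvCell g row col ≠ 0)).map
          (fun row => pvCell g row col)
        let pad := n - (nz.length : Int)
        (PySem.List.pyRange 0 n 1).foldl (fun g row =>
          pvPut g row col (if row < pad then 0 else PySem.List.pyGetD nz (row - pad) 0)) g) g ∧
      ShpP n (cols.foldl (fun g col =>
        let nz := ((PySem.List.pyRange 0 n 1).filter (fun row => pvCell g row col ≠ 0)).map
          (fun row => pvCell g row col)
        let pad := n - (nz.length : Int)
        (PySem.List.pyRange 0 n 1).foldl (fun g row =>
          pvPut g row col (if row < pad then 0 else PySem.List.pyGetD nz (row - pad) 0)) g) g) := by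
  induction cols with
  | nil => exact fun g hg => ⟨rfl, hg⟩
  | cons c tl ih =>
    intro g hg
    have hc := h c (by simp)
    have hcol := gravity_col_eq n c hc g hg
    rw [List.foldl_cons, List.foldl_cons]
    obtain ⟨ihe, ihs⟩ := ih (fun x hx => h x (by simp [hx])) _ hcol.2
    refine ⟨?_, ?_⟩
    · simp only []
      rw [hcol.1]
      exact ihe
    · simp only []
      exact ihs
-- ---------- cell enumeration ----------

def enumCells (n : Int) : List (Int × Int) :=
  (PySem.List.pyRange 0 n 1).flatMap (fun i => (PySem.List.pyRange 0 10 1).map (fun j => (i, j)))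

def suppL (n : Int) (g : List (List Int)) : List (Int × Int) :=
  (enumCells n).filter (fun c => pvCell g c.1 c.2 ≠ 0)

def flatI (c : Int × Int) : Int := c.1 * 10 + c.2

theorem mem_enumCells (n : Int) (c : Int × Int) : c ∈ enumCells n ↔ inbP n c := by
  simp only [enumCells, List.mem_flatMap, List.mem_map, PySem.List.mem_pyRange_one, inbP]
  constructor
  · rintro ⟨i, ⟨hi1, hi2⟩, j, ⟨hj1, hj2⟩, rfl⟩
    exact ⟨hi1, hi2, hj1, hj2⟩
  · rintro ⟨h1, h2, h3, h4⟩
    exact ⟨c.1, ⟨h1, h2⟩, c.2, ⟨h3, h4⟩, rfl⟩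

theorem nodup_enumCells (n : Int) : (enumCells n).Nodup := by
  rw [enumCells, List.nodup_flatMap]
  refine ⟨fun i _ => (PySem.List.nodup_pyRange_one 0 10).map (fun a b h => by
      simpa using congrArg Prod.snd h), ?_⟩
  refine (PySem.List.nodup_pyRange_one 0 n).pairwise_of_forall_ne ?_
  intro i hi i' hi' hne
  simp only [Function.onFun, List.disjoint_left, List.mem_map]
  rintro x ⟨j, _, rfl⟩ ⟨j', _, h⟩
  exact hne (by simpa using (congrArg Prod.fst h).symm)

theorem length_enumCells (n : Int) : (enumCells n).length = n.toNat * 10 := by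
  simp only [enumCells, List.length_flatMap, List.length_map, PySem.List.length_pyRange_one]
  rw [show (fun (_ : Int) => ((10 : Int) - 0).toNat) = (fun _ => 10) by funext; rfl]
  rw [List.map_const', List.sum_replicate, PySem.List.length_pyRange_one]
  simp

theorem mem_suppL (n : Int) (g : List (List Int)) (c : Int × Int) :
    c ∈ suppL n g ↔ suppP n g c := by
  simp [suppL, List.mem_filter, mem_enumCells, suppP]

theorem nodup_suppL (n : Int) (g : List (List Int)) : (suppL n g).Nodup :=
  (nodup_enumCells n).filter _

theorem length_suppL_le (n : Int) (g : List (List Int)) :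
    (suppL n g).length ≤ n.toNat * 10 := by
  rw [← length_enumCells n]
  exact List.length_filter_le _ _

-- nested range fold = fold over the cell enumeration
theorem nested_foldl {σ : Type} (f : σ → (Int × Int) → σ) (s : σ) (n : Int) :
    (PySem.List.pyRange 0 n 1).foldl (fun s i =>
      (PySem.List.pyRange 0 10 1).foldl (fun s j => f s (i, j)) s) s =
    (enumCells n).foldl f s := by
  unfold enumCells
  generalize PySem.List.pyRange 0 n 1 = l
  induction l generalizing s with
  | nil => rfl
  | cons a tl ih =>
    rw [List.foldl_cons, List.flatMap_cons, List.foldl_append, ih, List.foldl_map]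

theorem flatI_inj {n : Int} {c d : Int × Int} (hc : inbP n c) (hd : inbP n d)
    (h : flatI c = flatI d) : c = d := by
  obtain ⟨h1, h2, h3, h4⟩ := hc
  obtain ⟨h5, h6, h7, h8⟩ := hd
  unfold flatI at h
  exact Prod.ext (by omega) (by omega)

theorem flatI_nonneg {n : Int} {c : Int × Int} (hc : inbP n c) : 0 ≤ flatI c := by
  obtain ⟨h1, _, h3, _⟩ := hc
  unfold flatI; omega

theorem flatI_lt {n : Int} {c : Int × Int} (hc : inbP n c) : flatI c < n * 10 := by
  obtain ⟨h1, h2, h3, h4⟩ := hc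
  unfold flatI; omega

-- ---------- labels dictionary: initialisation ----------

theorem getD_foldl_insert_flat (g : List (List Int)) (l : List (Int × Int))
    (d : PySem.Dict (Int × Int) Int) (x : Int × Int) :
    (l.foldl (fun d c => d.insert c (flatI c)) d).getD x 0 =
      if x ∈ l then flatI x else d.getD x 0 := by
  induction l generalizing d with
  | nil => simp
  | cons c0 tl ih =>
    rw [List.foldl_cons, ih]
    by_cases hx : x ∈ tl
    · simp [hx]
    · by_cases he : x = c0
      · subst he
        simp [hx, PySem.Dict.getD_insert_self]
      · simp [hx, he, PySem.Dict.getD_insert_of_ne _ _ _ he]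

theorem foldl_guard_insert (g : List (List Int)) (l : List (Int × Int))
    (d : PySem.Dict (Int × Int) Int) :
    l.foldl (fun d c => if pvCell g c.1 c.2 ≠ 0 then d.insert c (c.1 * 10 + c.2) else d) d =
    (l.filter (fun c => pvCell g c.1 c.2 ≠ 0)).foldl (fun d c => d.insert c (c.1 * 10 + c.2)) d := by
  induction l generalizing d with
  | nil => rfl
  | cons c0 tl ih =>
    rw [List.foldl_cons, List.filter_cons]
    by_cases h : pvCell g c0.1 c0.2 ≠ 0
    · rw [if_pos h, ih]
      simp [h]
    · rw [if_neg h, ih]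
      simp [h]

theorem initLabels_eq (g : List (List Int)) (n : Int) :
    initLabels g n = (suppL n g).foldl (fun d c => d.insert c (flatI c)) PySem.Dict.empty := by
  unfold initLabels
  rw [nested_foldl (fun d (c : Int × Int) =>
    if pvCell g c.1 c.2 ≠ 0 then d.insert c (c.1 * 10 + c.2) else d) PySem.Dict.empty n]
  rw [foldl_guard_insert]
  rfl

theorem initLabels_items (g : List (List Int)) (n : Int) :
    (initLabels g n).items = (suppL n g).map (fun c => (c, flatI c)) := by
  rw [initLabels_eq]
  exact PySem.Dict.items_foldl_insert_fresh (suppL n g) (fun c => c) flatI PySem.Dict.empty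
    (fun a _ => PySem.Dict.contains_empty a) (by simpa using nodup_suppL n g)

theorem initLabels_keys (g : List (List Int)) (n : Int) :
    (initLabels g n).keys = suppL n g := by
  show (initLabels g n).items.map Prod.fst = _
  rw [initLabels_items, List.map_map]
  exact List.map_id _

theorem initLabels_getD (g : List (List Int)) (n : Int) (c : Int × Int) (hc : c ∈ suppL n g) :
    (initLabels g n).getD c 0 = flatI c := by
  rw [initLabels_eq, getD_foldl_insert_flat g _ _ c, if_pos hc]

-- ---------- the neighbour minimum fold ----------

def minf (g : List (List Int)) (L : PySem.Dict (Int × Int) Int) (c : Int × Int) (l : Int) : Int :=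
  [(c.1 - 1, c.2), (c.1 + 1, c.2), (c.1, c.2 - 1), (c.1, c.2 + 1)].foldl (fun m q =>
    if L.contains q && (pvCell g q.1 q.2 == pvCell g c.1 c.2) then
      (if L.getD q 0 < m then L.getD q 0 else m)
    else m) l

theorem sweepStep_eq (g : List (List Int)) (st : PySem.Dict (Int × Int) Int × Bool)
    (it : (Int × Int) × Int) :
    sweepStep g st it = if minf g st.1 it.1 it.2 < it.2
      then (st.1.insert it.1 (minf g st.1 it.1 it.2), true) else st := rfl

theorem foldmin_le_init (g : List (List Int)) (L : PySem.Dict (Int × Int) Int) (c : Int × Int)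
    (qs : List (Int × Int)) (l : Int) :
    qs.foldl (fun m q =>
      if L.contains q && (pvCell g q.1 q.2 == pvCell g c.1 c.2) then
        (if L.getD q 0 < m then L.getD q 0 else m)
      else m) l ≤ l := by
  induction qs generalizing l with
  | nil => simp
  | cons q tl ih =>
    rw [List.foldl_cons]
    by_cases h : (L.contains q && (pvCell g q.1 q.2 == pvCell g c.1 c.2)) = true
    · rw [if_pos h]
      by_cases h2 : L.getD q 0 < l
      · rw [if_pos h2]
        exact le_trans (ih _) (le_of_lt h2)
      · rw [if_neg h2]
        exact ih l
    · rw [if_neg h]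
      exact ih l

theorem foldmin_cases (g : List (List Int)) (L : PySem.Dict (Int × Int) Int) (c : Int × Int)
    (qs : List (Int × Int)) (l : Int) :
    (qs.foldl (fun m q =>
      if L.contains q && (pvCell g q.1 q.2 == pvCell g c.1 c.2) then
        (if L.getD q 0 < m then L.getD q 0 else m)
      else m) l = l) ∨
    ∃ q ∈ qs, (L.contains q && (pvCell g q.1 q.2 == pvCell g c.1 c.2)) = true ∧
      qs.foldl (fun m q =>
        if L.contains q && (pvCell g q.1 q.2 == pvCell g c.1 c.2) then
          (if L.getD q 0 < m then L.getD q 0 else m)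
        else m) l = L.getD q 0 := by
  induction qs generalizing l with
  | nil => left; rfl
  | cons q tl ih =>
    rw [List.foldl_cons]
    by_cases h : (L.contains q && (pvCell g q.1 q.2 == pvCell g c.1 c.2)) = true
    · rw [if_pos h]
      by_cases h2 : L.getD q 0 < l
      · rw [if_pos h2]
        rcases ih (L.getD q 0) with h3 | ⟨q', hq', hc', h3⟩
        · exact Or.inr ⟨q, by simp, h, h3⟩
        · exact Or.inr ⟨q', by simp [hq'], hc', h3⟩
      · rw [if_neg h2]
        rcases ih l with h3 | ⟨q', hq', hc', h3⟩
        · exact Or.inl h3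
        · exact Or.inr ⟨q', by simp [hq'], hc', h3⟩
    · rw [if_neg h]
      rcases ih l with h3 | ⟨q', hq', hc', h3⟩
      · exact Or.inl h3
      · exact Or.inr ⟨q', by simp [hq'], hc', h3⟩

theorem foldmin_le_elem (g : List (List Int)) (L : PySem.Dict (Int × Int) Int) (c : Int × Int)
    (qs : List (Int × Int)) (l : Int) (q : Int × Int) (hq : q ∈ qs)
    (hcond : (L.contains q && (pvCell g q.1 q.2 == pvCell g c.1 c.2)) = true) :
    qs.foldl (fun m q =>
      if L.contains q && (pvCell g q.1 q.2 == pvCell g c.1 c.2) then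
        (if L.getD q 0 < m then L.getD q 0 else m)
      else m) l ≤ L.getD q 0 := by
  induction qs generalizing l with
  | nil => cases hq
  | cons q0 tl ih =>
    rw [List.foldl_cons]
    rcases List.mem_cons.mp hq with rfl | hq'
    · rw [if_pos hcond]
      by_cases h2 : L.getD q 0 < l
      · rw [if_pos h2]
        exact le_trans (foldmin_le_init g L c tl _) (le_refl _)
      · rw [if_neg h2]
        exact le_trans (foldmin_le_init g L c tl _) (by omega)
    · by_cases h : (L.contains q0 && (pvCell g q0.1 q0.2 == pvCell g c.1 c.2)) = true
      · rw [if_pos h]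
        by_cases h2 : L.getD q0 0 < l
        · rw [if_pos h2]; exact ih _ hq'
        · rw [if_neg h2]; exact ih _ hq'
      · rw [if_neg h]; exact ih _ hq'
-- ---------- the label-propagation sweep ----------

def KinvD (n : Int) (g : List (List Int)) (L : PySem.Dict (Int × Int) Int) : Prop :=
  ∀ c ∈ suppL n g, ∃ d, ConnP n g c d ∧ L.getD c 0 = flatI d

def MlabD (n : Int) (g : List (List Int)) (L : PySem.Dict (Int × Int) Int) : Nat :=
  ((suppL n g).map (fun c => (L.getD c 0).toNat)).sum

def FixD (n : Int) (g : List (List Int)) (L : PySem.Dict (Int × Int) Int) : Prop :=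
  ∀ c ∈ suppL n g, ∀ q ∈ suppL n g, adjC c q →
    pvCell g q.1 q.2 = pvCell g c.1 c.2 → L.getD c 0 ≤ L.getD q 0

theorem adj_mem_cands {c q : Int × Int} (h : adjC c q) :
    q ∈ [(c.1 - 1, c.2), (c.1 + 1, c.2), (c.1, c.2 - 1), (c.1, c.2 + 1)] := by
  rcases h with ⟨h1, h2 | h2⟩ | ⟨h1, h2 | h2⟩
  · have : q = (c.1, c.2 + 1) := Prod.ext (by omega) (by omega)
    simp [this]
  · have : q = (c.1, c.2 - 1) := Prod.ext (by omega) (by omega)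
    simp [this]
  · have : q = (c.1 + 1, c.2) := Prod.ext (by omega) (by omega)
    simp [this]
  · have : q = (c.1 - 1, c.2) := Prod.ext (by omega) (by omega)
    simp [this]

theorem cands_adj {c q : Int × Int}
    (h : q ∈ [(c.1 - 1, c.2), (c.1 + 1, c.2), (c.1, c.2 - 1), (c.1, c.2 + 1)]) : adjC c q := by
  simp only [List.mem_cons, List.not_mem_nil, or_false] at h
  rcases h with rfl | rfl | rfl | rfl
  · exact Or.inr ⟨rfl, Or.inr rfl⟩
  · exact Or.inr ⟨rfl, Or.inl rfl⟩
  · exact Or.inl ⟨rfl, Or.inr rfl⟩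
  · exact Or.inl ⟨rfl, Or.inl rfl⟩

theorem kinv_nonneg {n : Int} {g : List (List Int)} {L : PySem.Dict (Int × Int) Int}
    (hk : KinvD n g L) {c : Int × Int} (hc : c ∈ suppL n g) : 0 ≤ L.getD c 0 := by
  obtain ⟨d, hconn, hval⟩ := hk c hc
  have hs := (conn_supp ((mem_suppL n g c).mp hc) hconn).1
  rw [hval]
  exact flatI_nonneg hs.1

theorem map_sum_lt (l : List (Int × Int)) (f f' : (Int × Int) → Nat) (hnd : l.Nodup)
    (c : Int × Int) (hc : c ∈ l) (hlt : f' c < f c) (he : ∀ x ∈ l, x ≠ c → f' x = f x) :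
    (l.map f').sum < (l.map f).sum := by
  induction l with
  | nil => cases hc
  | cons a tl ih =>
    rw [List.map_cons, List.map_cons, List.sum_cons, List.sum_cons]
    rcases List.mem_cons.mp hc with rfl | hc'
    · have : (tl.map f').sum = (tl.map f).sum := by
        congr 1
        apply List.map_congr_left
        intro x hx
        exact he x (by simp [hx]) (fun h => (List.nodup_cons.mp hnd).1 (h ▸ hx))
      omega
    · have hane : a ≠ c := fun h => (List.nodup_cons.mp hnd).1 (h ▸ hc')
      have h1 : f' a = f a := he a (by simp) hane
      have h2 := ih (List.nodup_cons.mp hnd).2 hc' (fun x hx hne => he x (by simp [hx]) hne)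
      omega

-- one full sweep over a snapshot of items
theorem sweep_fold (n : Int) (g : List (List Int)) :
    ∀ (R : List ((Int × Int) × Int)) (L : PySem.Dict (Int × Int) Int) (flag : Bool),
    L.keys = suppL n g →
    KinvD n g L →
    (∀ it ∈ R, it.1 ∈ suppL n g ∧ L.getD it.1 0 = it.2) →
    (R.map Prod.fst).Nodup →
    (R.foldl (sweepStep g) (L, flag)).1.keys = suppL n g ∧
    KinvD n g (R.foldl (sweepStep g) (L, flag)).1 ∧
    MlabD n g (R.foldl (sweepStep g) (L, flag)).1 ≤ MlabD n g L ∧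
    ((R.foldl (sweepStep g) (L, flag)).2 = flag ∨
      ((R.foldl (sweepStep g) (L, flag)).2 = true ∧
        MlabD n g (R.foldl (sweepStep g) (L, flag)).1 < MlabD n g L)) ∧
    ((R.foldl (sweepStep g) (L, flag)).2 = false →
      (R.foldl (sweepStep g) (L, flag)).1 = L ∧
      ∀ it ∈ R, ¬ (minf g L it.1 it.2 < it.2)) := by
  intro R
  induction R with
  | nil =>
    intro L flag hkeys hkinv _ _
    exact ⟨hkeys, hkinv, le_refl _, Or.inl rfl, fun _ => ⟨rfl, fun it h => absurd h (List.not_mem_nil)⟩⟩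
  | cons it tl ih =>
    intro L flag hkeys hkinv hsnap hnd
    obtain ⟨hit_supp, hit_val⟩ := hsnap it (by simp)
    rw [List.foldl_cons, sweepStep_eq]
    by_cases hm : minf g L it.1 it.2 < it.2
    · rw [if_pos hm]
      -- an improvement: find its source neighbour
      have hcases := foldmin_cases g L it.1
        [(it.1.1 - 1, it.1.2), (it.1.1 + 1, it.1.2), (it.1.1, it.1.2 - 1), (it.1.1, it.1.2 + 1)] it.2
      have hsrc : ∃ q, (L.contains q && (pvCell g q.1 q.2 == pvCell g it.1.1 it.1.2)) = true ∧
          adjC it.1 q ∧ minf g L it.1 it.2 = L.getD q 0 := by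
        rcases hcases with h | ⟨q, hq, hcond, hval⟩
        · exact absurd hm (by rw [show minf g L it.1 it.2 = it.2 from h]; omega)
        · exact ⟨q, hcond, cands_adj (by simpa using hq), hval⟩
      obtain ⟨q, hcond, hadj, hqval⟩ := hsrc
      obtain ⟨hcont, hcoleq⟩ := Bool.and_eq_true_iff.mp hcond
      have hqkeys : q ∈ suppL n g := by
        rw [← hkeys]; exact (PySem.Dict.contains_iff_mem_keys L q).mp hcont
      have hcol : pvCell g q.1 q.2 = pvCell g it.1.1 it.1.2 := by
        exact beq_iff_eq.mp hcoleq
      have hsupp_c := (mem_suppL n g it.1).mp hit_supp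
      have hsupp_q := (mem_suppL n g q).mp hqkeys
      have hE : EE n g it.1 q := ⟨hsupp_c.1, hsupp_q.1, hadj, hsupp_c.2, hcol.symm⟩
      -- the new dictionary
      set m := minf g L it.1 it.2 with hmdef
      have hkeys1 : (L.insert it.1 m).keys = suppL n g := by
        rw [PySem.Dict.keys_insert_of_contains L m
          ((PySem.Dict.contains_iff_mem_keys L it.1).mpr (by rw [hkeys]; exact hit_supp))]
        exact hkeys
      have hkinv1 : KinvD n g (L.insert it.1 m) := by
        intro c hc
        by_cases he : c = it.1
        · subst he
          obtain ⟨d, hconn, hval⟩ := hkinv q hqkeys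
          refine ⟨d, Relation.ReflTransGen.head hE hconn, ?_⟩
          rw [PySem.Dict.getD_insert_self, hqval, hval]
        · obtain ⟨d, hconn, hval⟩ := hkinv c hc
          exact ⟨d, hconn, by rw [PySem.Dict.getD_insert_of_ne _ _ _ he]; exact hval⟩
      have hm0 : 0 ≤ m := by rw [hqval]; exact kinv_nonneg hkinv hqkeys
      have hMlt : MlabD n g (L.insert it.1 m) < MlabD n g L := by
        apply map_sum_lt _ _ _ (nodup_suppL n g) it.1 hit_supp
        · rw [PySem.Dict.getD_insert_self]
          have h2 : 0 ≤ L.getD it.1 0 := kinv_nonneg hkinv hit_supp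
          rw [hit_val]
          omega
        · intro x _ hne
          rw [PySem.Dict.getD_insert_of_ne _ _ _ hne]
      have hnd' : it.1 ∉ tl.map Prod.fst ∧ (tl.map Prod.fst).Nodup :=
        List.nodup_cons.mp (by rw [List.map_cons] at hnd; exact hnd)
      have hsnap1 : ∀ it' ∈ tl, it'.1 ∈ suppL n g ∧ (L.insert it.1 m).getD it'.1 0 = it'.2 := by
        intro it' hit'
        have hne : it'.1 ≠ it.1 := by
          intro h
          exact hnd'.1 (h ▸ (List.mem_map.mpr ⟨it', hit', rfl⟩))
        exact ⟨(hsnap it' (by simp [hit'])).1,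
          by rw [PySem.Dict.getD_insert_of_ne _ _ _ hne]; exact (hsnap it' (by simp [hit'])).2⟩
      obtain ⟨r1, r2, r3, r4, _⟩ := ih (L.insert it.1 m) true hkeys1 hkinv1 hsnap1 hnd'.2
      refine ⟨r1, r2, le_trans r3 (le_of_lt hMlt), ?_, ?_⟩
      · rcases r4 with h | ⟨h, hlt⟩
        · exact Or.inr ⟨h, lt_of_le_of_lt r3 hMlt⟩
        · exact Or.inr ⟨h, lt_of_le_of_lt (le_of_lt hlt) hMlt⟩
      · intro hfalse
        rcases r4 with h | ⟨h, _⟩ <;> rw [h] at hfalse <;> cases hfalse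
    · rw [if_neg hm]
      have hnd' : it.1 ∉ tl.map Prod.fst ∧ (tl.map Prod.fst).Nodup :=
        List.nodup_cons.mp (by rw [List.map_cons] at hnd; exact hnd)
      obtain ⟨r1, r2, r3, r4, r5⟩ := ih L flag hkeys hkinv
        (fun it' h => hsnap it' (by simp [h])) hnd'.2
      refine ⟨r1, r2, r3, r4, fun hfalse => ?_⟩
      obtain ⟨hL, htl⟩ := r5 hfalse
      refine ⟨hL, fun it' h => ?_⟩
      rcases List.mem_cons.mp h with rfl | h'
      · exact hm
      · exact htl it' h'

theorem sweepLoop_spec (n : Int) (g : List (List Int)) :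
    ∀ (fuel : Nat) (L : PySem.Dict (Int × Int) Int), L.keys = suppL n g → KinvD n g L →
    MlabD n g L < fuel →
    (sweepLoop g fuel L).keys = suppL n g ∧ KinvD n g (sweepLoop g fuel L) ∧
      FixD n g (sweepLoop g fuel L) := by
  intro fuel
  induction fuel with
  | zero => intro L _ _ h; omega
  | succ f ih =>
    intro L hkeys hkinv hM
    have hitems : L.items = (suppL n g).map (fun c => (c, L.getD c 0)) := by
      rw [PySem.Dict.items_eq_map_keys L (by rw [hkeys]; exact nodup_suppL n g) 0, hkeys]
    have hsnap : ∀ it ∈ L.items, it.1 ∈ suppL n g ∧ L.getD it.1 0 = it.2 := by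
      intro it hit
      rw [hitems] at hit
      obtain ⟨c, hc, rfl⟩ := List.mem_map.mp hit
      exact ⟨hc, rfl⟩
    have hnd : (L.items.map Prod.fst).Nodup := by
      rw [hitems, List.map_map]
      exact (nodup_suppL n g).map (fun a b h => h)
    obtain ⟨r1, r2, r3, r4, r5⟩ := sweep_fold n g L.items L false hkeys hkinv hsnap hnd
    have hunfold : sweepLoop g (f + 1) L =
        if (L.items.foldl (sweepStep g) (L, false)).2 = true
        then sweepLoop g f (L.items.foldl (sweepStep g) (L, false)).1
        else (L.items.foldl (sweepStep g) (L, false)).1 := rfl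
    by_cases hb : (L.items.foldl (sweepStep g) (L, false)).2 = true
    · rw [hunfold, if_pos hb]
      apply ih _ r1 r2
      rcases r4 with h | ⟨_, hlt⟩
      · rw [h] at hb; cases hb
      · omega
    · rw [hunfold, if_neg hb]
      obtain ⟨hL, hnoimp⟩ := r5 (Bool.not_eq_true _ ▸ (by simpa using hb))
      rw [hL]
      refine ⟨hkeys, hkinv, ?_⟩
      intro c hc q hq hadj hcol
      have hni := hnoimp (c, L.getD c 0) (by rw [hitems]; exact List.mem_map.mpr ⟨c, hc, rfl⟩)
      have hle := foldmin_le_elem g L c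
        [(c.1 - 1, c.2), (c.1 + 1, c.2), (c.1, c.2 - 1), (c.1, c.2 + 1)]
        (L.getD c 0) q (adj_mem_cands hadj)
        (by rw [Bool.and_eq_true]
            exact ⟨(PySem.Dict.contains_iff_mem_keys L q).mpr (by rw [hkeys]; exact hq),
              beq_iff_eq.mpr hcol⟩)
      simp only [minf] at hni
      omega

-- ---------- removing the qualifying groups ----------

theorem removal_fold (n k : Int) (g : List (List Int)) (hg : ShpP n g) :
    ∀ (GS : List (List (Int × Int))) (flag : Bool) (h : List (List Int))
      (Q : (Int × Int) → Prop),
    (∀ G ∈ GS, ∀ c ∈ G, inbP n c) →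
    SameOut n g h →
    (∀ c, inbP n c → (Q c → pvCell h c.1 c.2 = 0) ∧
      (¬ Q c → pvCell h c.1 c.2 = pvCell g c.1 c.2)) →
    ((GS.foldl (fun (st : Bool × List (List Int)) cells =>
        if k ≤ (cells.length : Int) then
          (true, cells.foldl (fun g c => pvPut g c.1 c.2 0) st.2)
        else st) (flag, h)).1 = true ↔
      (flag = true ∨ ∃ G ∈ GS, k ≤ (G.length : Int))) ∧
    SameOut n g (GS.foldl (fun (st : Bool × List (List Int)) cells =>
        if k ≤ (cells.length : Int) then
          (true, cells.foldl (fun g c => pvPut g c.1 c.2 0) st.2)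
        else st) (flag, h)).2 ∧
    ∀ c, inbP n c →
      ((Q c ∨ ∃ G ∈ GS, k ≤ (G.length : Int) ∧ c ∈ G) →
        pvCell (GS.foldl (fun (st : Bool × List (List Int)) cells =>
          if k ≤ (cells.length : Int) then
            (true, cells.foldl (fun g c => pvPut g c.1 c.2 0) st.2)
          else st) (flag, h)).2 c.1 c.2 = 0) ∧
      (¬ (Q c ∨ ∃ G ∈ GS, k ≤ (G.length : Int) ∧ c ∈ G) →
        pvCell (GS.foldl (fun (st : Bool × List (List Int)) cells =>
          if k ≤ (cells.length : Int) then
            (true, cells.foldl (fun g c => pvPut g c.1 c.2 0) st.2)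
          else st) (flag, h)).2 c.1 c.2 = pvCell g c.1 c.2) := by
  intro GS
  induction GS with
  | nil =>
    intro flag h Q _ hso hcells
    refine ⟨by simp, hso, fun c hc => ⟨fun hq => ?_, fun hq => ?_⟩⟩
    · exact (hcells c hc).1 (by tauto)
    · exact (hcells c hc).2 (by tauto)
  | cons G0 tl ih =>
    intro flag h Q hinb hso hcells
    rw [List.foldl_cons]
    by_cases hbig : k ≤ (G0.length : Int)
    · rw [if_pos hbig]
      have hsh : ShpP n h := shp_of_sameOut hso hg
      obtain ⟨zso, zshp, zcell⟩ := zero_fold n h hsh G0 (hinb G0 (by simp))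
      have hso1 : SameOut n g (G0.foldl (fun g c => pvPut g c.1 c.2 0) h) :=
        sameOut_trans hso zso
      have hcells1 : ∀ c, inbP n c →
          ((Q c ∨ c ∈ G0) → pvCell (G0.foldl (fun g c => pvPut g c.1 c.2 0) h) c.1 c.2 = 0) ∧
          (¬ (Q c ∨ c ∈ G0) →
            pvCell (G0.foldl (fun g c => pvPut g c.1 c.2 0) h) c.1 c.2 = pvCell g c.1 c.2) := by
        intro c hc
        rw [zcell c hc]
        constructor
        · rintro (hq | hmem)
          · by_cases hmem : c ∈ G0
            · rw [if_pos hmem]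
            · rw [if_neg hmem]; exact (hcells c hc).1 hq
          · rw [if_pos hmem]
        · intro hq
          push Not at hq
          rw [if_neg hq.2]
          exact (hcells c hc).2 hq.1
      obtain ⟨i1, i2, i3⟩ := ih true _ (fun c => Q c ∨ c ∈ G0)
        (fun G hG => hinb G (by simp [hG])) hso1 hcells1
      refine ⟨?_, i2, fun c hc => ⟨fun hq => ?_, fun hq => ?_⟩⟩
      · rw [i1]
        exact ⟨fun _ => Or.inr ⟨G0, by simp, hbig⟩, fun _ => Or.inl rfl⟩
      · apply (i3 c hc).1
        rcases hq with hq | ⟨G, hG, hk, hmem⟩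
        · exact Or.inl (Or.inl hq)
        · rcases List.mem_cons.mp hG with rfl | hG'
          · exact Or.inl (Or.inr hmem)
          · exact Or.inr ⟨G, hG', hk, hmem⟩
      · apply (i3 c hc).2
        rintro ((hq2 | hmem) | ⟨G, hG, hk, hmem⟩)
        · exact hq (Or.inl hq2)
        · exact hq (Or.inr ⟨G0, by simp, hbig, hmem⟩)
        · exact hq (Or.inr ⟨G, by simp [hG], hk, hmem⟩)
    · rw [if_neg hbig]
      obtain ⟨i1, i2, i3⟩ := ih flag h Q (fun G hG => hinb G (by simp [hG])) hso hcells
      refine ⟨?_, i2, fun c hc => ⟨fun hq => ?_, fun hq => ?_⟩⟩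
      · rw [i1]
        constructor
        · rintro (hf | ⟨G, hG, hk⟩)
          · exact Or.inl hf
          · exact Or.inr ⟨G, by simp [hG], hk⟩
        · rintro (hf | ⟨G, hG, hk⟩)
          · exact Or.inl hf
          · rcases List.mem_cons.mp hG with rfl | hG'
            · exact absurd hk hbig
            · exact Or.inr ⟨G, hG', hk⟩
      · apply (i3 c hc).1
        rcases hq with hq | ⟨G, hG, hk, hmem⟩
        · exact Or.inl hq
        · rcases List.mem_cons.mp hG with rfl | hG'
          · exact absurd hk hbig
          · exact Or.inr ⟨G, hG', hk, hmem⟩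
      · apply (i3 c hc).2
        rintro (hq2 | ⟨G, hG, hk, hmem⟩)
        · exact hq (Or.inl hq2)
        · exact hq (Or.inr ⟨G, by simp [hG], hk, hmem⟩)

-- labels are constant on components at a fixpoint
theorem lab_const {n : Int} {g : List (List Int)} {L : PySem.Dict (Int × Int) Int}
    (hfix : FixD n g L) : ∀ c d, ConnP n g c d → L.getD c 0 = L.getD d 0 := by
  intro c d h
  induction h with
  | refl => rfl
  | tail _ he ih =>
    rename_i b d _
    obtain ⟨hib, hid, hadj, hnz, hcol⟩ := he
    have hb : b ∈ suppL n g := (mem_suppL n g b).mpr ⟨hib, hnz⟩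
    have hd : d ∈ suppL n g := (mem_suppL n g d).mpr ⟨hid, by rw [← hcol]; exact hnz⟩
    have h1 := hfix b hb d hd hadj hcol.symm
    have h2 := hfix d hd b hb (adjC_symm hadj) hcol
    omega

theorem conn_of_lab_eq {n : Int} {g : List (List Int)} {L : PySem.Dict (Int × Int) Int}
    (hkinv : KinvD n g L) {c d : Int × Int} (hc : c ∈ suppL n g) (hd : d ∈ suppL n g)
    (h : L.getD c 0 = L.getD d 0) : ConnP n g c d := by
  obtain ⟨a, hca, hva⟩ := hkinv c hc
  obtain ⟨b, hdb, hvb⟩ := hkinv d hd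
  have hsa := (conn_supp ((mem_suppL n g c).mp hc) hca).1
  have hsb := (conn_supp ((mem_suppL n g d).mp hd) hdb).1
  have hab : a = b := flatI_inj hsa.1 hsb.1 (by omega)
  exact conn_trans hca (hab ▸ conn_symm hdb)

-- full characterisation of pass B
theorem passB_spec (n k : Int) (g : List (List Int)) (hg : ShpP n g) :
    ((passB g n k).1 = true ↔ ∃ c, RemP n k g c) ∧
    SameOut n g (passB g n k).2 ∧
    ∀ c, inbP n c →
      (RemP n k g c → pvCell (passB g n k).2 c.1 c.2 = 0) ∧
      (¬ RemP n k g c → pvCell (passB g n k).2 c.1 c.2 = pvCell g c.1 c.2) := by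
  -- the stabilised label dictionary
  have hM0 : MlabD n g (initLabels g n) < n.toNat * 10 * (n.toNat * 10) + 1 := by
    unfold MlabD
    have hmap : (suppL n g).map (fun c => ((initLabels g n).getD c 0).toNat) =
        (suppL n g).map (fun c => (flatI c).toNat) :=
      List.map_congr_left (fun c hc => by rw [initLabels_getD g n c hc])
    rw [hmap]
    have hbound : ∀ x ∈ (suppL n g).map (fun c => (flatI c).toNat),
        x ≤ n.toNat * 10 - 1 := by
      intro x hx
      obtain ⟨c, hc, rfl⟩ := List.mem_map.mp hx
      have hs := (mem_suppL n g c).mp hc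
      have h1 := flatI_lt hs.1
      have h2 := flatI_nonneg hs.1
      have h3 : 0 < n := by obtain ⟨a, b, _, _⟩ := hs.1; omega
      omega
    have hsum := List.sum_le_card_nsmul _ _ hbound
    rw [List.length_map, smul_eq_mul] at hsum
    have hlen := length_suppL_le n g
    have h4 : (suppL n g).length * (n.toNat * 10 - 1) ≤ (n.toNat * 10) * (n.toNat * 10 - 1) :=
      Nat.mul_le_mul_right _ hlen
    have h5 : (n.toNat * 10) * (n.toNat * 10 - 1) ≤ (n.toNat * 10) * (n.toNat * 10) :=
      Nat.mul_le_mul_left _ (by omega)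
    omega
  obtain ⟨hkeys, hkinv, hfix⟩ := sweepLoop_spec n g (n.toNat * 10 * (n.toNat * 10) + 1)
    (initLabels g n) (initLabels_keys g n)
    (fun c hc => ⟨c, Relation.ReflTransGen.refl, initLabels_getD g n c hc⟩) hM0
  set L := sweepLoop g (n.toNat * 10 * (n.toNat * 10) + 1) (initLabels g n) with hL
  -- the items of the stabilised dictionary
  have hitems : L.items = (suppL n g).map (fun c => (c, L.getD c 0)) := by
    rw [PySem.Dict.items_eq_map_keys L (by rw [hkeys]; exact nodup_suppL n g) 0, hkeys]
  -- the groups dictionary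
  set G := L.items.foldl (fun d it => d.modify it.2 [] (fun l => l ++ [it.1]))
    (PySem.Dict.empty : PySem.Dict Int (List (Int × Int))) with hG
  have hGswap : G = ((L.items.map (fun it => (it.2, it.1))).foldl
      (fun d p => d.modify p.1 [] (fun l => l ++ [p.2])) PySem.Dict.empty) := by
    rw [hG, List.foldl_map]
  have hGgetD : ∀ v : Int, G.getD v [] = (suppL n g).filter (fun c => L.getD c 0 == v) := by
    intro v
    rw [hGswap, PySem.Dict.getD_foldl_modify_append _ _ v]
    rw [hitems, List.map_map, List.filter_map, List.map_map]
    have h0 : (PySem.Dict.empty : PySem.Dict Int (List (Int × Int))).getD v [] = [] := rfl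
    rw [h0, List.nil_append]
    simp only [Function.comp_def]
    simp
  have hGkeys : G.keys = PySem.Set.update ([] : PySem.Set Int)
      (L.items.map (fun it => it.2)) := by
    rw [hG, PySem.Dict.keys_foldl_modify_key L.items (fun it => it.2) []
      (fun _ it => (fun l => l ++ [it.1])) PySem.Dict.empty]
    rfl
  have hGkeys_mem : ∀ v : Int, v ∈ G.keys ↔ ∃ c ∈ suppL n g, L.getD c 0 = v := by
    intro v
    rw [hGkeys]
    show v ∈ PySem.Set.ofList (L.items.map (fun it => it.2)) ↔ _
    rw [PySem.Set.mem_ofList, hitems, List.map_map]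
    simp [Function.comp_def]
  have hGnodup : G.keys.Nodup := by
    rw [hG]
    exact PySem.Dict.nodup_keys_foldl_modify_key L.items (fun it => it.2) []
      (fun _ it => (fun l => l ++ [it.1])) PySem.Dict.empty (by
        show ([] : List Int).Nodup
        exact List.nodup_nil)
  have hGvalues : G.values = G.keys.map (fun v => G.getD v []) :=
    PySem.Dict.values_eq_map_keys G hGnodup []
  -- each group enumerates one component
  have hgroup_enum : ∀ c ∈ suppL n g, ∀ d,
      (d ∈ (suppL n g).filter (fun c' => L.getD c' 0 == L.getD c 0) ↔ ConnP n g c d) := by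
    intro c hc d
    rw [List.mem_filter]
    constructor
    · rintro ⟨hd, hbeq⟩
      exact conn_symm (conn_of_lab_eq hkinv hd hc (beq_iff_eq.mp hbeq))
    · intro hconn
      have hsupp := (conn_supp ((mem_suppL n g c).mp hc) hconn).1
      refine ⟨(mem_suppL n g d).mpr hsupp, beq_iff_eq.mpr ?_⟩
      exact (lab_const hfix c d hconn).symm
  have hbig_iff : ∀ c ∈ suppL n g, (RemP n k g c ↔
      k ≤ (((suppL n g).filter (fun c' => L.getD c' 0 == L.getD c 0)).length : Int)) := by
    intro c hc
    have := big_iff_of_enum (k := k) ((nodup_suppL n g).filter _) (hgroup_enum c hc)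
    constructor
    · intro hr; exact this.mp hr.2
    · intro hlen; exact ⟨(mem_suppL n g c).mp hc, this.mpr hlen⟩
  -- apply the removal fold
  obtain ⟨rf1, rf2, rf3⟩ := removal_fold n k g hg G.values false g (fun _ => False)
    (by
      intro Grp hGrp c hcg
      rw [hGvalues] at hGrp
      obtain ⟨v, _, rfl⟩ := List.mem_map.mp hGrp
      rw [hGgetD v] at hcg
      exact ((mem_suppL n g c).mp (List.mem_of_mem_filter hcg)).1)
    (sameOut_refl n g)
    (fun c hc => ⟨fun h => absurd h not_false, fun _ => rfl⟩)
  have hexist_iff : (∃ Grp ∈ G.values, k ≤ (Grp.length : Int)) ↔ ∃ c, RemP n k g c := by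
    constructor
    · rintro ⟨Grp, hGrp, hk⟩
      rw [hGvalues] at hGrp
      obtain ⟨v, hv, rfl⟩ := List.mem_map.mp hGrp
      obtain ⟨c0, hc0, hvc0⟩ := (hGkeys_mem v).mp hv
      refine ⟨c0, (hbig_iff c0 hc0).mpr ?_⟩
      rw [hGgetD v, ← hvc0] at hk
      exact hk
    · rintro ⟨c, hrem⟩
      have hc : c ∈ suppL n g := (mem_suppL n g c).mpr hrem.1
      refine ⟨G.getD (L.getD c 0) [], ?_, ?_⟩
      · rw [hGvalues]
        exact List.mem_map.mpr ⟨L.getD c 0, (hGkeys_mem _).mpr ⟨c, hc, rfl⟩, rfl⟩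
      · rw [hGgetD]
        exact (hbig_iff c hc).mp hrem
  have hmem_iff : ∀ c, inbP n c →
      ((∃ Grp ∈ G.values, k ≤ (Grp.length : Int) ∧ c ∈ Grp) ↔ RemP n k g c) := by
    intro c hcin
    constructor
    · rintro ⟨Grp, hGrp, hk, hmem⟩
      rw [hGvalues] at hGrp
      obtain ⟨v, hv, rfl⟩ := List.mem_map.mp hGrp
      rw [hGgetD v] at hk hmem
      have hc : c ∈ suppL n g := List.mem_of_mem_filter hmem
      have hvc : L.getD c 0 = v := beq_iff_eq.mp ((List.mem_filter.mp hmem).2)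
      rw [← hvc] at hk
      exact (hbig_iff c hc).mpr hk
    · intro hrem
      have hc : c ∈ suppL n g := (mem_suppL n g c).mpr hrem.1
      refine ⟨G.getD (L.getD c 0) [], ?_, ?_, ?_⟩
      · rw [hGvalues]
        exact List.mem_map.mpr ⟨L.getD c 0, (hGkeys_mem _).mpr ⟨c, hc, rfl⟩, rfl⟩
      · rw [hGgetD]
        exact (hbig_iff c hc).mp hrem
      · rw [hGgetD]
        exact List.mem_filter.mpr ⟨hc, beq_iff_eq.mpr rfl⟩
  refine ⟨?_, ?_, ?_⟩
  · show ((G.values.foldl (fun (st : Bool × List (List Int)) cells =>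
      if k ≤ (cells.length : Int) then
        (true, cells.foldl (fun g c => pvPut g c.1 c.2 0) st.2)
      else st) (false, g)).1 = true ↔ _)
    rw [rf1]
    simp only [Bool.false_eq_true, false_or]
    exact hexist_iff
  · exact rf2
  · intro c hcin
    constructor
    · intro hrem
      exact (rf3 c hcin).1 (Or.inr (by
        obtain ⟨Grp, h1, h2, h3⟩ := (hmem_iff c hcin).mpr hrem
        exact ⟨Grp, h1, h2, h3⟩))
    · intro hrem
      exact (rf3 c hcin).2 (by
        rintro (hf | hex)
        · exact hf
        · exact hrem ((hmem_iff c hcin).mp hex))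

-- ---------- visited matrix plumbing ----------

def visPred (v : List (List Bool)) (c : Int × Int) : Prop := vGet v c.1 c.2 = true

def VShapeP (n : Int) (v : List (List Bool)) : Prop :=
  v.length = n.toNat ∧ ∀ i : Nat, i < n.toNat → (v.getD i []).length = 10

theorem vGet_nonneg (v : List (List Bool)) (x y : Int) (hx : 0 ≤ x) (hy : 0 ≤ y) :
    vGet v x y = (v.getD x.toNat []).getD y.toNat false := by
  simp [vGet, pyGetD_nonneg' _ _ _ hx, pyGetD_nonneg' _ _ _ hy]

theorem vSet_eq (v : List (List Bool)) (x y : Int) (hx : 0 ≤ x) (hy : 0 ≤ y) :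
    vSet v x y = v.set x.toNat ((v.getD x.toNat []).set y.toNat true) := by
  simp [vSet, PySem.List.pySetD_of_nonneg _ _ hx, PySem.List.pySetD_of_nonneg _ _ hy,
    pyGetD_nonneg' _ _ _ hx]

theorem vshape_vSet {n : Int} {v : List (List Bool)} (hv : VShapeP n v) (x y : Int)
    (hx : 0 ≤ x) (hy : 0 ≤ y) : VShapeP n (vSet v x y) := by
  rw [vSet_eq v x y hx hy]
  refine ⟨by simp [hv.1], fun i hi => ?_⟩
  by_cases he : x.toNat = i
  · subst he
    by_cases hlt : x.toNat < v.length
    · rw [getD_set_self _ _ _ _ hlt, List.length_set]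
      exact hv.2 _ hi
    · rw [List.set_eq_of_length_le (by omega)]
      exact hv.2 _ hi
  · rw [getD_set_ne _ _ _ _ _ he]
    exact hv.2 _ hi

theorem visPred_vSet {n : Int} {v : List (List Bool)} (hv : VShapeP n v) (x y : Int)
    (hxy : inbP n (x, y)) (c : Int × Int) (hc : inbP n c) :
    visPred (vSet v x y) c ↔ (c = (x, y) ∨ visPred v c) := by
  obtain ⟨hx0, hxn, hy0, hy10⟩ := hxy
  obtain ⟨hc10, hc1n, hc20, hc210⟩ := hc
  have hxlen : x.toNat < v.length := by rw [hv.1]; omega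
  have hylen : y.toNat < (v.getD x.toNat []).length := by rw [hv.2 _ (by omega)]; omega
  unfold visPred
  rw [vGet_nonneg _ _ _ hc10 hc20, vSet_eq v x y hx0 hy0]
  by_cases h1 : c.1.toNat = x.toNat
  · rw [h1, getD_set_self _ _ _ _ hxlen]
    by_cases h2 : c.2.toNat = y.toNat
    · rw [h2, getD_set_self _ _ _ _ hylen]
      have hcx : c = (x, y) := by
        rw [Prod.ext_iff]
        exact ⟨by omega, by omega⟩
      simp [hcx]
    · rw [getD_set_ne _ _ _ _ _ (fun h => h2 h.symm)]
      have hne : c ≠ (x, y) := by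
        intro h; subst h; exact h2 (by simp)
      rw [vGet_nonneg _ _ _ hc10 hc20]
      simp [hne, h1]
  · rw [getD_set_ne _ _ _ _ _ (fun h => h1 h.symm)]
    have hne : c ≠ (x, y) := by
      intro h; subst h; exact h1 (by simp)
    rw [vGet_nonneg _ _ _ hc10 hc20]
    simp [hne]

-- number of unvisited in-bounds cells
def ubV (n : Int) (v : List (List Bool)) : Nat :=
  ((enumCells n).filter (fun c => !(vGet v c.1 c.2))).length

theorem filter_length_flip (l : List (Int × Int)) (p p' : (Int × Int) → Bool)
    (hnd : l.Nodup) (x : Int × Int) (hx : x ∈ l) (hpx : p x = true) (hpx' : p' x = false)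
    (he : ∀ y ∈ l, y ≠ x → p' y = p y) :
    (l.filter p').length + 1 = (l.filter p).length := by
  induction l with
  | nil => cases hx
  | cons a tl ih =>
    rw [List.filter_cons, List.filter_cons]
    rcases List.mem_cons.mp hx with rfl | hx'
    · rw [hpx, hpx']
      have : tl.filter p' = tl.filter p := by
        apply List.filter_congr
        intro y hy
        exact he y (by simp [hy]) (fun h => (List.nodup_cons.mp hnd).1 (h ▸ hy))
      simp [this]
    · have hane : a ≠ x := fun h => (List.nodup_cons.mp hnd).1 (h ▸ hx')
      have h1 : p' a = p a := he a (by simp) hane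
      have h2 := ih (List.nodup_cons.mp hnd).2 hx' (fun y hy hne => he y (by simp [hy]) hne)
      rw [h1]
      cases hpa : p a <;> simp [hpa, List.length_cons] <;> omega

theorem ubV_vSet {n : Int} {v : List (List Bool)} (hv : VShapeP n v) (x : Int × Int)
    (hx : inbP n x) (hnv : ¬ visPred v x) :
    ubV n (vSet v x.1 x.2) + 1 = ubV n v := by
  apply filter_length_flip _ _ _ (nodup_enumCells n) x ((mem_enumCells n x).mpr hx)
  · have : vGet v x.1 x.2 = false := by
      rcases h : vGet v x.1 x.2
      · rfl
      · exact absurd h hnv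
    simp [this]
  · have : vGet (vSet v x.1 x.2) x.1 x.2 = true :=
      (visPred_vSet hv x.1 x.2 hx x hx).mpr (Or.inl (Prod.ext rfl rfl))
    simp [this]
  · intro y hy hne
    have hyin := (mem_enumCells n y).mp hy
    have hiff := visPred_vSet hv x.1 x.2 hx y hyin
    unfold visPred at hiff
    rcases hvy : vGet (vSet v x.1 x.2) y.1 y.2
    · rcases hvy2 : vGet v y.1 y.2
      · simp [hvy, hvy2]
      · exact absurd (hiff.mpr (Or.inr hvy2)) (by simp [hvy])
    · rcases hvy2 : vGet v y.1 y.2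
      · rcases hiff.mp hvy with h | h
        · exact absurd (h.trans Prod.mk.eta) hne
        · exact absurd h (by simp [hvy2])
      · simp [hvy, hvy2]

theorem ubV_le (n : Int) (v : List (List Bool)) : ubV n v ≤ n.toNat * 10 := by
  rw [← length_enumCells n]
  exact List.length_filter_le _ _

theorem isInBounds_iff (x y n : Int) : isInBounds x y n 10 = true ↔ inbP n (x, y) := by
  simp [isInBounds, inbP, and_assoc]

-- ---------- the BFS flood fill ----------

def BfsInv (n : Int) (g0 : List (List Int)) (s : Int × Int) (vis0 : (Int × Int) → Prop)
    (q cells : List (Int × Int)) (v : List (List Bool)) : Prop :=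
  VShapeP n v ∧
  (∀ c, inbP n c → (visPred v c ↔ vis0 c ∨ c ∈ cells)) ∧
  (∀ c ∈ cells, ConnP n g0 s c) ∧
  cells.Nodup ∧ s ∈ cells ∧
  (∀ c ∈ q, c ∈ cells)

theorem vis0_disj {n : Int} {g0 : List (List Int)} {s : Int × Int}
    {vis0 : (Int × Int) → Prop}
    (hvis0closed : ∀ c d, vis0 c → EE n g0 c d → vis0 d) (hs0 : ¬ vis0 s) :
    ∀ c, ConnP n g0 s c → ¬ vis0 c := by
  have key : ∀ a b : Int × Int, ConnP n g0 a b → vis0 a → vis0 b := by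
    intro a b h
    induction h with
    | refl => exact id
    | tail _ he ih => exact fun ha => hvis0closed _ _ (ih ha) he
  exact fun c hconn hc => hs0 (key c s (conn_symm hconn) hc)

theorem dir_adj (c0 d : Int × Int)
    (hd : d ∈ [((-1 : Int), (0 : Int)), (1, 0), (0, -1), (0, 1)]) :
    adjC c0 (c0.1 + d.1, c0.2 + d.2) := by
  simp only [List.mem_cons, List.not_mem_nil, or_false] at hd
  rcases hd with rfl | rfl | rfl | rfl
  · exact Or.inr ⟨by omega, Or.inr (by omega)⟩
  · exact Or.inr ⟨by omega, Or.inl (by omega)⟩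
  · exact Or.inl ⟨by omega, Or.inr (by omega)⟩
  · exact Or.inl ⟨by omega, Or.inl (by omega)⟩

theorem adj_to_dir {c0 e : Int × Int} (h : adjC c0 e) :
    ∃ d ∈ [((-1 : Int), (0 : Int)), (1, 0), (0, -1), (0, 1)],
      e = (c0.1 + d.1, c0.2 + d.2) := by
  rcases h with ⟨h1, h2 | h2⟩ | ⟨h1, h2 | h2⟩
  · exact ⟨(0, 1), by simp, Prod.ext (by omega) (by omega)⟩
  · exact ⟨(0, -1), by simp, Prod.ext (by omega) (by omega)⟩
  · exact ⟨(1, 0), by simp, Prod.ext (by omega) (by omega)⟩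
  · exact ⟨(-1, 0), by simp, Prod.ext (by omega) (by omega)⟩

theorem bfsStep_spec (n : Int) (g g0 : List (List Int)) (color : Int) (s : Int × Int)
    (vis0 : (Int × Int) → Prop)
    (hagree : ∀ c, inbP n c → ¬ vis0 c → pvCell g c.1 c.2 = pvCell g0 c.1 c.2)
    (hvis0supp : ∀ c, vis0 c → suppP n g0 c)
    (hvis0closed : ∀ c d, vis0 c → EE n g0 c d → vis0 d)
    (hs : suppP n g0 s) (hs0 : ¬ vis0 s) (hcolor : color = pvCell g0 s.1 s.2)
    (q cells : List (Int × Int)) (v : List (List Bool)) (c0 : Int × Int) (hc0 : c0 ∈ cells)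
    (hinv : BfsInv n g0 s vis0 q cells v) (d : Int × Int)
    (hd : d ∈ [((-1 : Int), (0 : Int)), (1, 0), (0, -1), (0, 1)]) :
    ∃ (q' : List (Int × Int)) (v' : List (List Bool)) (cells' : List (Int × Int)),
      bfsStep g n color c0 (q, v, cells) d = (q', v', cells') ∧
      BfsInv n g0 s vis0 q' cells' v' ∧
      q'.length + ubV n v' = q.length + ubV n v ∧
      q <+: q' ∧ cells <+: cells' ∧
      (∀ x ∈ cells', x ∈ cells ∨ x ∈ q') ∧
      (EE n g0 c0 (c0.1 + d.1, c0.2 + d.2) → (c0.1 + d.1, c0.2 + d.2) ∈ cells') := by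
  obtain ⟨hvs, hvchar, hconn, hnd, hsmem, hq⟩ := hinv
  have hc0conn : ConnP n g0 s c0 := hconn c0 hc0
  have hc0supp := conn_supp hs hc0conn
  have hdisj := vis0_disj hvis0closed hs0
  unfold bfsStep
  simp only []
  set cc : Int × Int := (c0.1 + d.1, c0.2 + d.2) with hccdef
  by_cases hcond : (isInBounds (c0.1 + d.1) (c0.2 + d.2) n 10 &&
      !vGet v (c0.1 + d.1) (c0.2 + d.2) &&
      (pvCell g (c0.1 + d.1) (c0.2 + d.2) == color)) = true
  · rw [if_pos hcond]
    obtain ⟨h12, h3⟩ := Bool.and_eq_true_iff.mp hcond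
    obtain ⟨h1, h2⟩ := Bool.and_eq_true_iff.mp h12
    have hccin : inbP n cc := (isInBounds_iff _ _ n).mp h1
    have hccnv : ¬ visPred v cc := by
      unfold visPred
      intro h
      rw [show cc.1 = c0.1 + d.1 from rfl, show cc.2 = c0.2 + d.2 from rfl] at h
      simp only [Bool.not_eq_true'] at h2
      rw [h2] at h
      cases h
    have hccnv0 : ¬ vis0 cc := fun h => hccnv ((hvchar cc hccin).mpr (Or.inl h))
    have hccnc : cc ∉ cells := fun h => hccnv ((hvchar cc hccin).mpr (Or.inr h))
    have hgcc : pvCell g cc.1 cc.2 = color := beq_iff_eq.mp h3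
    have hg0cc : pvCell g0 cc.1 cc.2 = color := by
      rw [← hagree cc hccin hccnv0]; exact hgcc
    have hEE : EE n g0 c0 cc := by
      refine ⟨hc0supp.1.1, hccin, dir_adj c0 d hd, hc0supp.1.2, ?_⟩
      rw [hc0supp.2, ← hcolor, hg0cc]
    have hccconn : ConnP n g0 s cc := Relation.ReflTransGen.tail hc0conn hEE
    refine ⟨q ++ [cc], vSet v cc.1 cc.2, cells ++ [cc], rfl, ?_, ?_, ?_, ?_, ?_, ?_⟩
    · refine ⟨vshape_vSet hvs cc.1 cc.2 hccin.1 hccin.2.2.1, ?_, ?_, ?_, ?_, ?_⟩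
      · intro c hcin
        rw [show visPred (vSet v cc.1 cc.2) c ↔ (c = (cc.1, cc.2) ∨ visPred v c) from
          visPred_vSet hvs cc.1 cc.2 hccin c hcin]
        rw [hvchar c hcin]
        simp only [List.mem_append, List.mem_singleton]
        constructor
        · rintro (h | h | h)
          · exact Or.inr (Or.inr (h.trans Prod.mk.eta))
          · exact Or.inl h
          · exact Or.inr (Or.inl h)
        · rintro (h | h | h)
          · exact Or.inr (Or.inl h)
          · exact Or.inr (Or.inr h)
          · exact Or.inl (h ▸ Prod.mk.eta.symm)
      · intro c hcin
        rcases List.mem_append.mp hcin with h | h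
        · exact hconn c h
        · rw [List.mem_singleton.mp h]; exact hccconn
      · rw [List.nodup_append]
        exact ⟨hnd, List.nodup_singleton _,
          fun a ha b hb => fun he => by
            rw [List.mem_singleton] at hb
            subst hb; subst he
            exact hccnc ha⟩
      · exact List.mem_append.mpr (Or.inl hsmem)
      · intro c hcin
        rcases List.mem_append.mp hcin with h | h
        · exact List.mem_append.mpr (Or.inl (hq c h))
        · exact List.mem_append.mpr (Or.inr h)
    · rw [List.length_append, List.length_singleton]
      have := ubV_vSet hvs cc hccin hccnv
      omega
    · exact List.prefix_append q [cc]
    · exact List.prefix_append cells [cc]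
    · intro x hx
      rcases List.mem_append.mp hx with h | h
      · exact Or.inl h
      · exact Or.inr (List.mem_append.mpr (Or.inr h))
    · exact fun _ => List.mem_append.mpr (Or.inr (by simp))
  · rw [if_neg hcond]
    refine ⟨q, v, cells, rfl, ⟨hvs, hvchar, hconn, hnd, hsmem, hq⟩, rfl,
      List.prefix_refl q, List.prefix_refl cells, fun x hx => Or.inl hx, ?_⟩
    intro hEE
    obtain ⟨_, hccin, _, _, hcol⟩ := hEE
    have hg0cc : pvCell g0 cc.1 cc.2 = color := by
      rw [← hcol, hc0supp.2, hcolor]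
    by_cases hvcc : visPred v cc
    · rcases (hvchar cc hccin).mp hvcc with h | h
      · exact absurd h (hdisj cc (Relation.ReflTransGen.tail hc0conn
          ⟨hc0supp.1.1, hccin, dir_adj c0 d hd, hc0supp.1.2, hcol⟩))
      · exact h
    · exfalso
      apply hcond
      have hccnv0 : ¬ vis0 cc := fun h => hvcc ((hvchar cc hccin).mpr (Or.inl h))
      have hgcc : pvCell g cc.1 cc.2 = color := by
        rw [hagree cc hccin hccnv0]; exact hg0cc
      rw [Bool.and_eq_true, Bool.and_eq_true]
      refine ⟨⟨(isInBounds_iff _ _ n).mpr hccin, ?_⟩, beq_iff_eq.mpr hgcc⟩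
      simp only [Bool.not_eq_true']
      rcases h : vGet v cc.1 cc.2
      · rfl
      · exact absurd h hvcc

theorem bfsLoop_spec (n : Int) (g g0 : List (List Int)) (color : Int) (s : Int × Int)
    (vis0 : (Int × Int) → Prop)
    (hagree : ∀ c, inbP n c → ¬ vis0 c → pvCell g c.1 c.2 = pvCell g0 c.1 c.2)
    (hvis0supp : ∀ c, vis0 c → suppP n g0 c)
    (hvis0closed : ∀ c d, vis0 c → EE n g0 c d → vis0 d)
    (hs : suppP n g0 s) (hs0 : ¬ vis0 s) (hcolor : color = pvCell g0 s.1 s.2) :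
    ∀ (fuel : Nat) (q cells : List (Int × Int)) (v : List (List Bool)),
      BfsInv n g0 s vis0 q cells v →
      (∀ c ∈ cells, c ∉ q → ∀ e, EE n g0 c e → e ∈ cells) →
      q.length + ubV n v ≤ fuel →
      VShapeP n (bfsLoop g n color fuel q v cells).1 ∧
      (∀ c, inbP n c → (visPred (bfsLoop g n color fuel q v cells).1 c ↔
        vis0 c ∨ c ∈ (bfsLoop g n color fuel q v cells).2)) ∧
      (bfsLoop g n color fuel q v cells).2.Nodup ∧
      (∀ c, c ∈ (bfsLoop g n color fuel q v cells).2 ↔ ConnP n g0 s c) := by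
  intro fuel
  induction fuel with
  | zero =>
    intro q cells v hinv hclosed hfuel
    obtain ⟨hvs, hvchar, hconn, hnd, hsmem, hq⟩ := hinv
    have hqnil : q = [] := List.eq_nil_of_length_eq_zero (by omega)
    subst hqnil
    refine ⟨hvs, hvchar, hnd, fun c => ⟨hconn c, ?_⟩⟩
    intro he
    induction he with
    | refl => exact hsmem
    | tail _ hbc ih => exact hclosed _ ih (List.not_mem_nil) _ hbc
  | succ f ih =>
    intro q cells v hinv hclosed hfuel
    rcases q with _ | ⟨c0, rest⟩
    · obtain ⟨hvs, hvchar, hconn, hnd, hsmem, hq⟩ := hinv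
      refine ⟨hvs, hvchar, hnd, fun c => ⟨hconn c, ?_⟩⟩
      intro he
      induction he with
      | refl => exact hsmem
      | tail _ hbc ih2 => exact hclosed _ ih2 (List.not_mem_nil) _ hbc
    · have hc0 : c0 ∈ cells := hinv.2.2.2.2.2 c0 (by simp)
      have hinv0 : BfsInv n g0 s vis0 rest cells v := by
        obtain ⟨hvs, hvchar, hconn, hnd, hsmem, hq⟩ := hinv
        exact ⟨hvs, hvchar, hconn, hnd, hsmem, fun c hcm => hq c (by simp [hcm])⟩
      obtain ⟨q1, v1, cells1, he1, hi1, hm1, hpq1, hpc1, hsplit1, hee1⟩ :=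
        bfsStep_spec n g g0 color s vis0 hagree hvis0supp hvis0closed hs hs0 hcolor
          rest cells v c0 hc0 hinv0 (-1, 0) (by simp)
      obtain ⟨q2, v2, cells2, he2, hi2, hm2, hpq2, hpc2, hsplit2, hee2⟩ :=
        bfsStep_spec n g g0 color s vis0 hagree hvis0supp hvis0closed hs hs0 hcolor
          q1 cells1 v1 c0 (hpc1.subset hc0) hi1 (1, 0) (by simp)
      obtain ⟨q3, v3, cells3, he3, hi3, hm3, hpq3, hpc3, hsplit3, hee3⟩ :=
        bfsStep_spec n g g0 color s vis0 hagree hvis0supp hvis0closed hs hs0 hcolor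
          q2 cells2 v2 c0 (hpc2.subset (hpc1.subset hc0)) hi2 (0, -1) (by simp)
      obtain ⟨q4, v4, cells4, he4, hi4, hm4, hpq4, hpc4, hsplit4, hee4⟩ :=
        bfsStep_spec n g g0 color s vis0 hagree hvis0supp hvis0closed hs hs0 hcolor
          q3 cells3 v3 c0 (hpc3.subset (hpc2.subset (hpc1.subset hc0))) hi3 (0, 1) (by simp)
      have hfold : [((-1 : Int), (0 : Int)), (1, 0), (0, -1), (0, 1)].foldl
          (bfsStep g n color c0) (rest, v, cells) = (q4, v4, cells4) := by
        simp only [List.foldl_cons, List.foldl_nil]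
        rw [he1, he2, he3, he4]
      have hunfold : bfsLoop g n color (f + 1) (c0 :: rest) v cells =
          bfsLoop g n color f q4 v4 cells4 := by
        show bfsLoop g n color f
          ([((-1 : Int), (0 : Int)), (1, 0), (0, -1), (0, 1)].foldl
            (bfsStep g n color c0) (rest, v, cells)).1 _ _ = _
        rw [hfold]
      rw [hunfold]
      -- closure for the new state
      have hcell_sub : ∀ x ∈ cells4, x ∈ cells ∨ x ∈ q4 := by
        intro x hx
        rcases hsplit4 x hx with hx3 | hxq
        · rcases hsplit3 x hx3 with hx2 | hxq
          · rcases hsplit2 x hx2 with hx1 | hxq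
            · rcases hsplit1 x hx1 with hx0 | hxq
              · exact Or.inl hx0
              · exact Or.inr (((hpq2.trans hpq3).trans hpq4).subset hxq)
            · exact Or.inr ((hpq3.trans hpq4).subset hxq)
          · exact Or.inr (hpq4.subset hxq)
        · exact Or.inr hxq
      have hc0closed : ∀ e, EE n g0 c0 e → e ∈ cells4 := by
        intro e hEE
        obtain ⟨d, hd, rfl⟩ := adj_to_dir hEE.2.2.1
        simp only [List.mem_cons, List.not_mem_nil, or_false] at hd
        rcases hd with rfl | rfl | rfl | rfl
        · exact (hpc2.trans (hpc3.trans hpc4)).subset (hee1 hEE)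
        · exact (hpc3.trans hpc4).subset (hee2 hEE)
        · exact hpc4.subset (hee3 hEE)
        · exact hee4 hEE
      have hclosed4 : ∀ c ∈ cells4, c ∉ q4 → ∀ e, EE n g0 c e → e ∈ cells4 := by
        intro c hcm hcq e hEE
        rcases hcell_sub c hcm with hcold | hcq4
        · by_cases hcc0 : c = c0
          · subst hcc0
            exact hc0closed e hEE
          · have hcrest : c ∉ rest := by
              intro h
              exact hcq ((((hpq1.trans hpq2).trans hpq3).trans hpq4).subset h)
            have := hclosed c hcold (by simp [hcc0, hcrest]) e hEE
            exact ((hpc1.trans hpc2).trans (hpc3.trans hpc4)).subset this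
        · exact absurd hcq4 hcq
      apply ih q4 cells4 v4 hi4 hclosed4
      have hlen : q4.length + ubV n v4 = rest.length + ubV n v := by
        rw [hm4, hm3, hm2, hm1]
      simp only [List.length_cons] at hfuel
      omega

theorem bfs_spec (n k : Int) (g g0 : List (List Int)) (x y : Int)
    (vis0 : (Int × Int) → Prop) (v : List (List Bool))
    (hvs : VShapeP n v)
    (hvchar : ∀ c, inbP n c → (visPred v c ↔ vis0 c))
    (hagree : ∀ c, inbP n c → ¬ vis0 c → pvCell g c.1 c.2 = pvCell g0 c.1 c.2)
    (hvis0supp : ∀ c, vis0 c → suppP n g0 c)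
    (hvis0closed : ∀ c d, vis0 c → EE n g0 c d → vis0 d)
    (hs : suppP n g0 (x, y)) (hs0 : ¬ vis0 (x, y)) :
    ∃ cl : List (Int × Int),
      cl.Nodup ∧ (∀ d, d ∈ cl ↔ ConnP n g0 (x, y) d) ∧
      VShapeP n (bfs g x y n k v).1 ∧
      (∀ c, inbP n c →
        (visPred (bfs g x y n k v).1 c ↔ vis0 c ∨ ConnP n g0 (x, y) c)) ∧
      ((k ≤ (cl.length : Int) ∧ (bfs g x y n k v).2 = cl) ∨
       (¬ k ≤ (cl.length : Int) ∧ (bfs g x y n k v).2 = [])) := by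
  have hsin : inbP n (x, y) := hs.1
  have hcolor : pvCell g x y = pvCell g0 (x, y).1 (x, y).2 := hagree (x, y) hsin hs0
  set r := bfsLoop g n (pvCell g x y) (n.toNat * 10 + 1) [(x, y)]
    (vSet v x y) [(x, y)] with hr
  have hbfs : bfs g x y n k v = if k ≤ (r.2.length : Int) then r else (r.1, []) := rfl
  have hnv : ¬ visPred v (x, y) := fun h => hs0 ((hvchar (x, y) hsin).mp h)
  have hv1s : VShapeP n (vSet v x y) := vshape_vSet hvs x y hsin.1 hsin.2.2.1
  have hv1char : ∀ c, inbP n c →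
      (visPred (vSet v x y) c ↔ vis0 c ∨ c ∈ [(x, y)]) := by
    intro c hcin
    rw [show vSet v x y = vSet v (x, y).1 (x, y).2 from rfl,
      visPred_vSet hvs (x, y).1 (x, y).2 hsin c hcin]
    simp only [List.mem_singleton]
    constructor
    · rintro (h | h)
      · exact Or.inr h
      · exact Or.inl ((hvchar c hcin).mp h)
    · rintro (h | h)
      · exact Or.inr ((hvchar c hcin).mpr h)
      · exact Or.inl h
  have hinv : BfsInv n g0 (x, y) vis0 [(x, y)] [(x, y)] (vSet v x y) :=
    ⟨hv1s, hv1char, fun c hc => (List.mem_singleton.mp hc) ▸ Relation.ReflTransGen.refl,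
      List.nodup_singleton _, by simp, fun c hc => hc⟩
  have hclosed : ∀ c ∈ [(x, y)], c ∉ [(x, y)] →
      ∀ e, EE n g0 c e → e ∈ [(x, y)] := fun c hc hnc => absurd hc hnc
  have hub : ubV n (vSet v x y) + 1 = ubV n v := ubV_vSet hvs (x, y) hsin hnv
  have hub2 := ubV_le n v
  have hfuel : ([(x, y)] : List (Int × Int)).length + ubV n (vSet v x y) ≤
      n.toNat * 10 + 1 := by
    simp only [List.length_singleton]
    omega
  obtain ⟨c1, c2, c3, c4⟩ := bfsLoop_spec n g g0 (pvCell g x y) (x, y) vis0 hagree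
    hvis0supp hvis0closed hs hs0 hcolor (n.toNat * 10 + 1) [(x, y)] [(x, y)]
    (vSet v x y) hinv hclosed hfuel
  refine ⟨r.2, c3, c4, ?_, ?_, ?_⟩
  · rw [hbfs]
    by_cases hk : k ≤ (r.2.length : Int)
    · rw [if_pos hk]; exact c1
    · rw [if_neg hk]; exact c1
  · intro c hcin
    have := c2 c hcin
    rw [hbfs]
    by_cases hk : k ≤ (r.2.length : Int)
    · rw [if_pos hk]
      exact this.trans (or_congr_right (c4 c))
    · rw [if_neg hk]
      exact this.trans (or_congr_right (c4 c))
  · by_cases hk : k ≤ (r.2.length : Int)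
    · rw [hbfs, if_pos hk]
      exact Or.inl ⟨hk, rfl⟩
    · rw [hbfs, if_neg hk]
      exact Or.inr ⟨hk, rfl⟩

-- ---------- the row-major scan of pass A ----------

def scanBody (n k : Int) (st : List (List Bool) × Bool × List (List Int)) (c : Int × Int) :
    List (List Bool) × Bool × List (List Int) :=
  if pvCell st.2.2 c.1 c.2 ≠ 0 && !(vGet st.1 c.1 c.2) then
    let r := bfs st.2.2 c.1 c.2 n k st.1
    if r.2 ≠ [] then
      (r.1, true, r.2.foldl (fun g cc => pvPut g cc.1 cc.2 0) st.2.2)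
    else (r.1, st.2.1, st.2.2)
  else st

def ScanInv (n k : Int) (g0 : List (List Int))
    (st : List (List Bool) × Bool × List (List Int)) : Prop :=
  VShapeP n st.1 ∧
  (∀ c, inbP n c → visPred st.1 c → suppP n g0 c) ∧
  (∀ c d, inbP n c → visPred st.1 c → EE n g0 c d → visPred st.1 d) ∧
  SameOut n g0 st.2.2 ∧
  (∀ c, inbP n c →
    ((visPred st.1 c ∧ BigP n k g0 c) → pvCell st.2.2 c.1 c.2 = 0) ∧
    (¬ (visPred st.1 c ∧ BigP n k g0 c) → pvCell st.2.2 c.1 c.2 = pvCell g0 c.1 c.2)) ∧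
  (st.2.1 = true ↔ ∃ c, inbP n c ∧ visPred st.1 c ∧ BigP n k g0 c)

theorem scanBody_spec (n k : Int) (g0 : List (List Int)) (hg0 : ShpP n g0)
    (st : List (List Bool) × Bool × List (List Int)) (hinv : ScanInv n k g0 st)
    (c0 : Int × Int) (hc0 : inbP n c0) :
    ScanInv n k g0 (scanBody n k st c0) ∧
    (∀ c, inbP n c → visPred st.1 c → visPred (scanBody n k st c0).1 c) ∧
    (suppP n g0 c0 → visPred (scanBody n k st c0).1 c0) := by
  obtain ⟨F1, F2, F3, F4, F5, F6⟩ := hinv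
  by_cases hvis : visPred st.1 c0
  · have hcond : (pvCell st.2.2 c0.1 c0.2 ≠ 0 && !(vGet st.1 c0.1 c0.2)) = false := by
      unfold visPred at hvis
      simp [hvis]
    unfold scanBody
    rw [hcond]
    simp only [Bool.false_eq_true, if_false]
    exact ⟨⟨F1, F2, F3, F4, F5, F6⟩, fun c _ h => h, fun _ => hvis⟩
  · have hcell : pvCell st.2.2 c0.1 c0.2 = pvCell g0 c0.1 c0.2 :=
      (F5 c0 hc0).2 (fun h => hvis h.1)
    by_cases hz : pvCell g0 c0.1 c0.2 = 0
    · have hcond : (pvCell st.2.2 c0.1 c0.2 ≠ 0 && !(vGet st.1 c0.1 c0.2)) = false := by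
        rw [hcell]
        simp [hz]
      unfold scanBody
      rw [hcond]
      simp only [Bool.false_eq_true, if_false]
      exact ⟨⟨F1, F2, F3, F4, F5, F6⟩, fun c _ h => h,
        fun hsupp => absurd hz hsupp.2⟩
    · have hsupp : suppP n g0 c0 := ⟨hc0, hz⟩
      have hcond : (pvCell st.2.2 c0.1 c0.2 ≠ 0 && !(vGet st.1 c0.1 c0.2)) = true := by
        rw [hcell]
        have : vGet st.1 c0.1 c0.2 = false := by
          rcases h : vGet st.1 c0.1 c0.2
          · rfl
          · exact absurd h hvis
        simp [hz, this]
      unfold scanBody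
      rw [hcond]
      simp only [if_true]
      obtain ⟨cl, hclnd, hclmem, hvs', hvchar', hres⟩ := bfs_spec n k st.2.2 g0 c0.1 c0.2
        (fun c => inbP n c ∧ visPred st.1 c) st.1 F1
        (fun c hcin => ⟨fun h => ⟨hcin, h⟩, And.right⟩)
        (fun c hcin hnv => (F5 c hcin).2 (fun h => hnv ⟨hcin, h.1⟩))
        (fun c h => F2 c h.1 h.2)
        (fun c d h hE => ⟨hE.2.1, F3 c d h.1 h.2 hE⟩)
        hsupp (fun h => hvis h.2)
      set r := bfs st.2.2 c0.1 c0.2 n k st.1 with hr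
      have hc0cl : c0 ∈ cl := (hclmem c0).mpr Relation.ReflTransGen.refl
      rcases hres with ⟨hk, hr2⟩ | ⟨hnk, hr2⟩
      · -- qualifying component: removed
        have hBig : BigP n k g0 c0 := ⟨cl, hclnd, hclmem, hk⟩
        have hrne : r.2 ≠ [] := by rw [hr2]; exact List.ne_nil_of_mem hc0cl
        rw [if_pos hrne]
        have hShp : ShpP n st.2.2 := shp_of_sameOut F4 hg0
        have hclinb : ∀ c ∈ cl, inbP n c :=
          fun c hc => (conn_supp hsupp ((hclmem c).mp hc)).1.1
        have hr2inb : ∀ c ∈ r.2, inbP n c := by rw [hr2]; exact hclinb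
        obtain ⟨zso, zshp, zcell⟩ := zero_fold n st.2.2 hShp r.2 hr2inb
        refine ⟨⟨hvs', ?_, ?_, sameOut_trans F4 zso, ?_, ?_⟩, ?_, ?_⟩
        · intro c hcin hv
          rcases (hvchar' c hcin).mp hv with h | h
          · exact F2 c h.1 h.2
          · exact (conn_supp hsupp h).1
        · intro c d hcin hv hE
          have hdin : inbP n d := hE.2.1
          rcases (hvchar' c hcin).mp hv with h | h
          · exact (hvchar' d hdin).mpr (Or.inl ⟨hdin, F3 c d h.1 h.2 hE⟩)
          · exact (hvchar' d hdin).mpr (Or.inr (Relation.ReflTransGen.tail h hE))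
        · intro c hcin
          rw [zcell c hcin]
          constructor
          · rintro ⟨hv, hb⟩
            by_cases hmem : c ∈ r.2
            · rw [if_pos hmem]
            · rw [if_neg hmem]
              rcases (hvchar' c hcin).mp hv with h | h
              · exact (F5 c hcin).1 ⟨h.2, hb⟩
              · exact absurd ((hclmem c).mpr h) (by rw [← hr2] at *; exact hmem)
          · intro hnb
            have hmem : c ∉ r.2 := by
              intro hmem
              rw [hr2] at hmem
              have hconn := (hclmem c).mp hmem
              exact hnb ⟨(hvchar' c hcin).mpr (Or.inr hconn),
                (big_congr hconn).mp hBig⟩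
            rw [if_neg hmem]
            apply (F5 c hcin).2
            rintro ⟨hv, hb⟩
            exact hnb ⟨(hvchar' c hcin).mpr (Or.inl ⟨hcin, hv⟩), hb⟩
        · constructor
          · intro _
            exact ⟨c0, hc0, (hvchar' c0 hc0).mpr (Or.inr Relation.ReflTransGen.refl), hBig⟩
          · intro _
            rfl
        · intro c hcin hv
          exact (hvchar' c hcin).mpr (Or.inl ⟨hcin, hv⟩)
        · intro _
          exact (hvchar' c0 hc0).mpr (Or.inr Relation.ReflTransGen.refl)
      · -- too small: only the visited matrix changes
        have hnBig : ¬ BigP n k g0 c0 :=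
          fun hb => hnk ((big_iff_of_enum hclnd hclmem).mp hb)
        rw [if_neg (by rw [hr2]; exact not_not_intro rfl)]
        refine ⟨⟨hvs', ?_, ?_, F4, ?_, ?_⟩, ?_, ?_⟩
        · intro c hcin hv
          rcases (hvchar' c hcin).mp hv with h | h
          · exact F2 c h.1 h.2
          · exact (conn_supp hsupp h).1
        · intro c d hcin hv hE
          have hdin : inbP n d := hE.2.1
          rcases (hvchar' c hcin).mp hv with h | h
          · exact (hvchar' d hdin).mpr (Or.inl ⟨hdin, F3 c d h.1 h.2 hE⟩)
          · exact (hvchar' d hdin).mpr (Or.inr (Relation.ReflTransGen.tail h hE))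
        · intro c hcin
          constructor
          · rintro ⟨hv, hb⟩
            rcases (hvchar' c hcin).mp hv with h | h
            · exact (F5 c hcin).1 ⟨h.2, hb⟩
            · exact absurd ((big_congr h).mpr hb) hnBig
          · intro hnb
            apply (F5 c hcin).2
            rintro ⟨hv, hb⟩
            exact hnb ⟨(hvchar' c hcin).mpr (Or.inl ⟨hcin, hv⟩), hb⟩
        · rw [F6]
          constructor
          · rintro ⟨c, hcin, hv, hb⟩
            exact ⟨c, hcin, (hvchar' c hcin).mpr (Or.inl ⟨hcin, hv⟩), hb⟩
          · rintro ⟨c, hcin, hv, hb⟩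
            rcases (hvchar' c hcin).mp hv with h | h
            · exact ⟨c, hcin, h.2, hb⟩
            · exact absurd ((big_congr h).mpr hb) hnBig
        · intro c hcin hv
          exact (hvchar' c hcin).mpr (Or.inl ⟨hcin, hv⟩)
        · intro _
          exact (hvchar' c0 hc0).mpr (Or.inr Relation.ReflTransGen.refl)

theorem scan_fold (n k : Int) (g0 : List (List Int)) (hg0 : ShpP n g0) :
    ∀ (CL : List (Int × Int)), (∀ c ∈ CL, inbP n c) →
    ∀ st, ScanInv n k g0 st →
      ScanInv n k g0 (CL.foldl (scanBody n k) st) ∧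
      (∀ c, inbP n c → visPred st.1 c → visPred (CL.foldl (scanBody n k) st).1 c) ∧
      (∀ c ∈ CL, suppP n g0 c → visPred (CL.foldl (scanBody n k) st).1 c) := by
  intro CL
  induction CL with
  | nil => exact fun _ st hinv => ⟨hinv, fun _ _ h => h, fun c hc => absurd hc (List.not_mem_nil)⟩
  | cons c0 tl ih =>
    intro hCL st hinv
    have hc0 := hCL c0 (by simp)
    obtain ⟨s1, s2, s3⟩ := scanBody_spec n k g0 hg0 st hinv c0 hc0
    obtain ⟨i1, i2, i3⟩ := ih (fun c hc => hCL c (by simp [hc])) (scanBody n k st c0) s1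
    rw [List.foldl_cons]
    refine ⟨i1, fun c hcin hv => i2 c hcin (s2 c hcin hv), ?_⟩
    intro c hc hsupp
    rcases List.mem_cons.mp hc with rfl | hc'
    · exact i2 c hc0 (s3 hsupp)
    · exact i3 c hc' hsupp

-- ---------- pass A characterisation and the final equivalence ----------

theorem getD_replicate_false (j : Nat) : (List.replicate 10 false).getD j false = false := by
  rcases Nat.lt_or_ge j 10 with h | h
  · rw [List.getD_eq_getElem _ _ (by simpa using h)]
    rw [List.getElem_replicate]
  · rw [List.getD_eq_default _ _ (by simpa using h)]

theorem passA_eq (g : List (List Int)) (n k : Int) :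
    passA g n k =
      (((enumCells n).foldl (scanBody n k)
        ((PySem.List.pyRange 0 n 1).map (fun _ => List.replicate 10 false), false, g)).2.1,
       ((enumCells n).foldl (scanBody n k)
        ((PySem.List.pyRange 0 n 1).map (fun _ => List.replicate 10 false), false, g)).2.2) := by
  unfold passA
  rw [← nested_foldl (scanBody n k) _ n]
  rfl

theorem passA_spec (n k : Int) (g : List (List Int)) (hg : ShpP n g) :
    ((passA g n k).1 = true ↔ ∃ c, RemP n k g c) ∧
    SameOut n g (passA g n k).2 ∧
    ∀ c, inbP n c →
      (RemP n k g c → pvCell (passA g n k).2 c.1 c.2 = 0) ∧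
      (¬ RemP n k g c → pvCell (passA g n k).2 c.1 c.2 = pvCell g c.1 c.2) := by
  set v0 : List (List Bool) :=
    (PySem.List.pyRange 0 n 1).map (fun _ => List.replicate 10 false) with hv0
  have hv0len : v0.length = n.toNat := by
    simp [hv0, PySem.List.length_pyRange_one]
  have hrow : ∀ i : Nat, i < n.toNat → v0.getD i [] = List.replicate 10 false := by
    intro i hi
    rw [List.getD_eq_getElem _ _ (by omega)]
    simp [hv0]
  have hv0s : VShapeP n v0 := by
    refine ⟨hv0len, fun i hi => ?_⟩
    rw [hrow i hi]
    simp
  have hv0vis : ∀ c, inbP n c → ¬ visPred v0 c := by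
    intro c hc hvp
    obtain ⟨h1, h2, h3, h4⟩ := hc
    unfold visPred at hvp
    rw [vGet_nonneg _ _ _ h1 h3, hrow c.1.toNat (by omega), getD_replicate_false] at hvp
    cases hvp
  have hinv0 : ScanInv n k g (v0, false, g) := by
    refine ⟨hv0s, ?_, ?_, sameOut_refl n g, ?_, ?_⟩
    · exact fun c hc hv => absurd hv (hv0vis c hc)
    · exact fun c d hc hv _ => absurd hv (hv0vis c hc)
    · exact fun c hc => ⟨fun h => absurd h.1 (hv0vis c hc), fun _ => rfl⟩
    · constructor
      · intro h; cases h
      · rintro ⟨c, hc, hv, _⟩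
        exact absurd hv (hv0vis c hc)
  obtain ⟨hinv, _, hcover⟩ := scan_fold n k g hg (enumCells n)
    (fun c hc => (mem_enumCells n c).mp hc) (v0, false, g) hinv0
  obtain ⟨F1, F2, F3, F4, F5, F6⟩ := hinv
  set st := (enumCells n).foldl (scanBody n k) (v0, false, g) with hst
  have hsub : ∀ c, inbP n c → (visPred st.1 c ↔ suppP n g c) := by
    intro c hc
    exact ⟨fun hv => F2 c hc hv,
      fun hs => hcover c ((mem_enumCells n c).mpr hc) hs⟩
  rw [passA_eq g n k]
  refine ⟨?_, F4, ?_⟩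
  · rw [show (((st.2.1 : Bool), st.2.2).1 = true) = (st.2.1 = true) from rfl, F6]
    constructor
    · rintro ⟨c, hc, hv, hb⟩
      exact ⟨c, (hsub c hc).mp hv, hb⟩
    · rintro ⟨c, hs, hb⟩
      exact ⟨c, hs.1, (hsub c hs.1).mpr hs, hb⟩
  · intro c hc
    constructor
    · rintro ⟨hs, hb⟩
      exact (F5 c hc).1 ⟨(hsub c hc).mpr hs, hb⟩
    · intro hnr
      apply (F5 c hc).2
      rintro ⟨hv, hb⟩
      exact hnr ⟨(hsub c hc).mp hv, hb⟩

theorem pass_eq (n k : Int) (g : List (List Int)) (hg : ShpP n g) :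
    passA g n k = passB g n k := by
  obtain ⟨a1, a2, a3⟩ := passA_spec n k g hg
  obtain ⟨b1, b2, b3⟩ := passB_spec n k g hg
  have hb : (passA g n k).1 = (passB g n k).1 :=
    Bool.coe_iff_coe.mp (a1.trans b1.symm)
  have hgrid : (passA g n k).2 = (passB g n k).2 := by
    apply grid_ext hg a2 b2
    intro c hc
    by_cases hr : RemP n k g c
    · rw [(a3 c hc).1 hr, (b3 c hc).1 hr]
    · rw [(a3 c hc).2 hr, (b3 c hc).2 hr]
  exact Prod.ext hb hgrid

theorem applyGravity_eq (n : Int) (g : List (List Int)) (hg : ShpP n g) :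
    applyGravityA g n = applyGravityB g n ∧ ShpP n (applyGravityB g n) := by
  unfold applyGravityA applyGravityB
  exact gravity_fold n (PySem.List.pyRange 0 10 1)
    (fun c hc => (PySem.List.mem_pyRange_one).mp hc) g hg

theorem loop_eq (n k : Int) :
    ∀ (fuel : Nat) (g : List (List Int)), ShpP n g →
      loopA n k fuel g = loopB n k fuel g := by
  intro fuel
  induction fuel with
  | zero => exact fun g _ => rfl
  | succ f ih =>
    intro g hg
    have hpa : loopA n k (f + 1) g =
        if (passA g n k).1 then loopA n k f (applyGravityA (passA g n k).2 n)
        else (passA g n k).2 := rfl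
    have hpb : loopB n k (f + 1) g =
        if (passB g n k).1 then loopB n k f (applyGravityB (passB g n k).2 n)
        else (passB g n k).2 := rfl
    rw [hpa, hpb, pass_eq n k g hg]
    have hshp : ShpP n (passB g n k).2 :=
      shp_of_sameOut (passB_spec n k g hg).2.1 hg
    by_cases hf : (passB g n k).1 = true
    · rw [if_pos hf, if_pos hf]
      obtain ⟨hgeq, hgs⟩ := applyGravity_eq n (passB g n k).2 hshp
      rw [hgeq]
      exact ih _ hgs
    · rw [if_neg hf, if_neg hf]

theorem shp_of_pre {n k : Int} {grid : List (List Int)} (hpre : Pre_process n k grid) :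
    ShpP n grid := by
  obtain ⟨h1, h2⟩ := hpre
  refine ⟨h1, fun i hi => ?_⟩
  have hil : i < grid.length := by omega
  rw [List.getD_eq_getElem _ _ hil]
  apply h2
  have hiN : i < n.toNat := by omega
  have h3 : i < (grid.take n.toNat).length := by simp; omega
  have := List.getElem_take (xs := grid) (i := i) (h := h3)
  rw [← this]
  exact List.getElem_mem h3

-- ===== VERDICT (by name: the statement is the Claim_ definition above) =====
theorem process_spec : Claim_equal_process := by
  intro n k grid _ hpre
  unfold Spec_process process process_alt
  exact loop_eq n k (pvFuel grid n) grid (shp_of_pre hpre)
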